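-- pv_equiv track=rewrite | github.com/th-nuernberg/llars | app/routes/latex_collab/latex_commit_routes.py | calculate_char_diff
-- ===== SOURCE A (Python) =====
-- from difflib import SequenceMatcher, unified_diff
--
-- def calculate_char_diff(baseline: str, current: str) -> tuple[int, int]:
--     """
--     Calculate the number of inserted and deleted characters between two strings.
--
--     Uses SequenceMatcher to find matching blocks and calculates the actual
--     character-level insertions and deletions.
--
--     Returns:
--         tuple: (insertions, deletions) - number of characters added/removed
--     """
--     if baseline == current:
--         return 0, 0
--
--     matcher = SequenceMatcher(None, baseline, current, autojunk=False)
--     insertions = 0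
--     deletions = 0
--
--     for tag, i1, i2, j1, j2 in matcher.get_opcodes():
--         if tag == 'replace':
--             deletions += i2 - i1
--             insertions += j2 - j1
--         elif tag == 'delete':
--             deletions += i2 - i1
--         elif tag == 'insert':
--             insertions += j2 - j1
--         # 'equal' tags don't contribute to changes
--
--     return insertions, deletions
-- ===== SOURCE B (Python) =====
-- def _longest_match(a, b, alo, ahi, blo, bhi):
--     """Longest block with a[i:i+k] == b[j:j+k] inside a[alo:ahi] x b[blo:bhi];
--     ties broken towards the smallest i, then the smallest j.  Computed with a
--     rolling row of run lengths (cur[idx] = length of the common run ending at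
--     (i, blo+idx)), no index maps and no extension passes."""
--     bi, bj, bk = alo, blo, 0
--     width = bhi - blo
--     prev = [0] * width
--     for i in range(alo, ahi):
--         cur = [0] * width
--         ai = a[i]
--         for idx in range(width):
--             if ai == b[blo + idx]:
--                 k = prev[idx - 1] + 1 if idx else 1
--                 cur[idx] = k
--                 if k > bk:
--                     bi, bj, bk = i - k + 1, blo + idx - k + 1, k
--         prev = cur
--     return bi, bj, bk
--
--
-- def calculate_char_diff(baseline: str, current: str) -> tuple[int, int]:
--     """
--     Calculate the number of inserted and deleted characters between two strings.
--
--     Totals the matched characters directly: an explicit stack of index windows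
--     is split around each window's longest matching block, and the two counts
--     are returned as a closed form over the total matched length (no opcode
--     tags, no block lists, equal strings match fully and give (0, 0)).
--
--     Returns:
--         tuple: (insertions, deletions) - number of characters added/removed
--     """
--     matched = 0
--     stack = [(0, len(baseline), 0, len(current))]
--     while stack:
--         alo, ahi, blo, bhi = stack.pop()
--         i, j, k = _longest_match(baseline, current, alo, ahi, blo, bhi)
--         if k:
--             matched += k
--             stack.append((alo, i, blo, j))
--             stack.append((i + k, ahi, j + k, bhi))
--     return len(current) - matched, len(baseline) - matched
-- ===== Notes on version B (the rewrite author's own statement) =====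
-- stated objective: alternative
-- what changed: B re-implements the matching from scratch with a different structure: a rolling-row run-length DP per window (no character-position map, no per-row hash of run lengths, no extension passes) finds each window's longest matching block, an explicit stack of index windows replaces the recursion/queue and the block list, and the two counts come out as a closed form (len(current)-matched, len(baseline)-matched) with no opcode tag dispatch and no equal-strings guard.
import Mathlib
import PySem

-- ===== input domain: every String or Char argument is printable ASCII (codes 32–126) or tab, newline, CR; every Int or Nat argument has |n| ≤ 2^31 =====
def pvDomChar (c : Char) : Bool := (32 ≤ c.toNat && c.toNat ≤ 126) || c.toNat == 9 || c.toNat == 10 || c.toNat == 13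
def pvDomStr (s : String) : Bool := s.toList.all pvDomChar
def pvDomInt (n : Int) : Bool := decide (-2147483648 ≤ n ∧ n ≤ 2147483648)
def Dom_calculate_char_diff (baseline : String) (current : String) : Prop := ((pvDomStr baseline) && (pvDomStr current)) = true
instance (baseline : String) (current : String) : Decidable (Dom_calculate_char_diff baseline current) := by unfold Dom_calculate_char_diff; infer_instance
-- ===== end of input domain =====

-- B re-implements the matching with a different structure (rolling-row run-length
-- DP per window, an explicit stack of windows, a direct matched-character total
-- and a closed form for the two counts, no equal-strings guard); the dl_* helpers
-- below model difflib.SequenceMatcher (isjunk=None, autojunk=False) for port A.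

-- ===== SHARED LIBRARY MODEL: difflib.SequenceMatcher(None, a, b, autojunk=False) =====

-- b2j: for i, elt in enumerate(b): b2j.setdefault(elt, []).append(i)
def dl_b2j (b : List Char) : PySem.Dict Char (List Nat) :=
  b.zipIdx.foldl (fun d p => d.modify p.1 [] (· ++ [p.2])) PySem.Dict.empty

-- inner loop of find_longest_match: 'for j in b2j.get(a[i], [])' with continue/break;
-- j2len is keyed by Int so that the Python lookup j2len.get(j-1, 0) is exact at j = 0.
def dl_inner (blo bhi i : Nat) (j2len : PySem.Dict Int Nat) :
    List Nat → PySem.Dict Int Nat → Nat × Nat × Nat → PySem.Dict Int Nat × (Nat × Nat × Nat)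
  | [], new, best => (new, best)
  | j :: js, new, best =>
    if j < blo then dl_inner blo bhi i j2len js new best            -- continue
    else if bhi ≤ j then (new, best)                                 -- break
    else
      let k := (j2len.getD ((j : Int) - 1) 0) + 1
      let new' := new.insert (j : Int) k
      let best' := if best.2.2 < k then (i + 1 - k, j + 1 - k, k) else best
      dl_inner blo bhi i j2len js new' best'

-- first extension loop: extend best by matching elements on the left
-- (indices are in range on every reachable state, so getD is exact there)
def dl_extendL (a b : List Char) (alo blo : Nat) (besti bestj bestsize : Nat) : Nat × Nat × Nat :=
  if alo < besti ∧ blo < bestj ∧ a.getD (besti - 1) ' ' = b.getD (bestj - 1) ' ' then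
    dl_extendL a b alo blo (besti - 1) (bestj - 1) (bestsize + 1)
  else (besti, bestj, bestsize)
termination_by besti
decreasing_by omega

-- second extension loop: extend on the right
def dl_extendR (a b : List Char) (ahi bhi : Nat) (besti bestj bestsize : Nat) : Nat × Nat × Nat :=
  if besti + bestsize < ahi ∧ bestj + bestsize < bhi ∧
      a.getD (besti + bestsize) ' ' = b.getD (bestj + bestsize) ' ' then
    dl_extendR a b ahi bhi besti bestj (bestsize + 1)
  else (besti, bestj, bestsize)
termination_by ahi - (besti + bestsize)
decreasing_by omega

-- find_longest_match(alo, ahi, blo, bhi); the junk set is empty (isjunk=None,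
-- autojunk=False), so difflib's two junk-extension loops are no-ops and are omitted.
def dl_flm (a b : List Char) (d : PySem.Dict Char (List Nat)) (alo ahi blo bhi : Nat) :
    Nat × Nat × Nat :=
  let st := (List.range' alo (ahi - alo)).foldl
    (fun (st : PySem.Dict Int Nat × (Nat × Nat × Nat)) i =>
      dl_inner blo bhi i st.1 (d.getD (a.getD i ' ') []) PySem.Dict.empty st.2)
    (PySem.Dict.empty, (alo, blo, 0))
  let (besti, bestj, bestsize) := st.2
  let (besti, bestj, bestsize) := dl_extendL a b alo blo besti bestj bestsize
  dl_extendR a b ahi bhi besti bestj bestsize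

-- the queue loop of get_matching_blocks followed by .sort(): the collected blocks come
-- from a-disjoint regions, so the sorted result equals this in-order recursion; fuel
-- a.length + 1 bounds the recursion depth (each left/right region is strictly narrower in a).
def dl_matchRec (a b : List Char) (d : PySem.Dict Char (List Nat)) :
    Nat → Nat → Nat → Nat → Nat → List (Nat × Nat × Nat)
  | 0, _, _, _, _ => []
  | fuel + 1, alo, ahi, blo, bhi =>
    let (i, j, k) := dl_flm a b d alo ahi blo bhi
    if k = 0 then []
    else
      (if alo < i ∧ blo < j then dl_matchRec a b d fuel alo i blo j else [])
        ++ [(i, j, k)]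
        ++ (if i + k < ahi ∧ j + k < bhi then dl_matchRec a b d fuel (i + k) ahi (j + k) bhi else [])

-- the collapse-adjacent loop of get_matching_blocks (i1 = j1 = k1 = 0 to start)
def dl_merge (i1 j1 k1 : Nat) : List (Nat × Nat × Nat) → List (Nat × Nat × Nat)
  | [] => if k1 ≠ 0 then [(i1, j1, k1)] else []
  | (i2, j2, k2) :: bs =>
    if i1 + k1 = i2 ∧ j1 + k1 = j2 then dl_merge i1 j1 (k1 + k2) bs
    else (if k1 ≠ 0 then [(i1, j1, k1)] else []) ++ dl_merge i2 j2 k2 bs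

-- get_matching_blocks(): recurse, collapse adjacent, append the (la, lb, 0) sentinel
def dl_getMatchingBlocks (a b : List Char) : List (Nat × Nat × Nat) :=
  dl_merge 0 0 0 (dl_matchRec a b (dl_b2j b) (a.length + 1) 0 a.length 0 b.length)
    ++ [(a.length, b.length, 0)]

-- get_opcodes(): walk the matching blocks emitting tagged ranges
def dl_opcodes : Nat → Nat → List (Nat × Nat × Nat) → List (String × Nat × Nat × Nat × Nat)
  | _, _, [] => []
  | i, j, (ai, bj, size) :: rest =>
    let tag : String :=
      if i < ai ∧ j < bj then "replace"
      else if i < ai then "delete"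
      else if j < bj then "insert"
      else ""
    (if tag ≠ "" then [(tag, i, ai, j, bj)] else [])
      ++ (if size ≠ 0 then [("equal", ai, ai + size, bj, bj + size)] else [])
      ++ dl_opcodes (ai + size) (bj + size) rest

-- ===== PORT A =====
def calculate_char_diff (baseline : String) (current : String) : Int × Int :=
  if baseline == current then (0, 0)
  else
    let a := baseline.toList
    let c := current.toList
    let st := (dl_opcodes 0 0 (dl_getMatchingBlocks a c)).foldl
      (fun (s : Nat × Nat) op =>
        let (ins, del) := s
        let (tag, i1, i2, j1, j2) := op
        if tag = "replace" then (ins + (j2 - j1), del + (i2 - i1))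
        else if tag = "delete" then (ins, del + (i2 - i1))
        else if tag = "insert" then (ins + (j2 - j1), del)
        else (ins, del))
      (0, 0)
    ((st.1 : Int), (st.2 : Int))

-- ===== PORT B =====
-- _longest_match: rolling row of run lengths (cur[idx] = length of the common run
-- ending at (i, blo+idx)); ties resolved by the first strict improvement.
def flm2 (a b : List Char) (alo ahi blo bhi : Nat) : Nat × Nat × Nat :=
  let width := bhi - blo
  let st := (List.range' alo (ahi - alo)).foldl
    (fun (st : List Nat × (Nat × Nat × Nat)) i =>
      let ai := a.getD i ' '
      (List.range width).foldl
        (fun (rs : List Nat × (Nat × Nat × Nat)) idx =>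
          if ai = b.getD (blo + idx) ' ' then
            let k := if idx = 0 then 1 else st.1.getD (idx - 1) 0 + 1
            let cur' := rs.1.set idx k
            let best' := if rs.2.2.2 < k then (i + 1 - k, blo + idx + 1 - k, k) else rs.2
            (cur', best')
          else rs)
        (List.replicate width 0, st.2))
    (List.replicate width 0, (alo, blo, 0))
  st.2

-- the 'while stack' loop of calculate_char_diff: pop a window, add its longest
-- match, push the two flanking windows; fuel 2*len(a)+2 bounds the iterations
-- (the sum of 2*(ahi-alo)+1 over the stack drops every step).
def loopB (a b : List Char) : Nat → List (Nat × Nat × Nat × Nat) → Nat → Nat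
  | 0, _, m => m
  | _ + 1, [], m => m
  | fuel + 1, (alo, ahi, blo, bhi) :: ws, m =>
    let (i, j, k) := flm2 a b alo ahi blo bhi
    if k ≠ 0 then
      loopB a b fuel ((i + k, ahi, j + k, bhi) :: (alo, i, blo, j) :: ws) (m + k)
    else loopB a b fuel ws m

def calculate_char_diff_alt (baseline : String) (current : String) : Int × Int :=
  let a := baseline.toList
  let c := current.toList
  let matched := loopB a c (2 * a.length + 2) [(0, a.length, 0, c.length)] 0
  ((c.length : Int) - (matched : Int), (a.length : Int) - (matched : Int))

-- ===== PRECONDITION & SPEC =====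
def Spec_calculate_char_diff (baseline : String) (current : String) (out : Int × Int) : Prop := out = calculate_char_diff_alt baseline current
instance (baseline : String) (current : String) (out : Int × Int) : Decidable (Spec_calculate_char_diff baseline current out) := by unfold Spec_calculate_char_diff; infer_instance

-- ===== CLAIM (what is proved, stated in full; the proofs are below) =====
def Claim_equal_calculate_char_diff : Prop := ∀ (baseline : String) (current : String), Dom_calculate_char_diff baseline current → Spec_calculate_char_diff baseline current (calculate_char_diff baseline current)

-- ===== LEMMAS AND PROOFS =====

-- blocks chained from (i0, j0), staying inside [0, ihi] × [0, jhi]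
def ChainB (i0 j0 ihi jhi : Nat) : List (Nat × Nat × Nat) → Prop
  | [] => i0 ≤ ihi ∧ j0 ≤ jhi
  | (i, j, k) :: rest => i0 ≤ i ∧ j0 ≤ j ∧ ChainB (i + k) (j + k) ihi jhi rest

def sumK : List (Nat × Nat × Nat) → Nat
  | [] => 0
  | (_, _, k) :: rest => k + sumK rest

def endA (i0 : Nat) : List (Nat × Nat × Nat) → Nat
  | [] => i0
  | (i, _, k) :: rest => endA (i + k) rest

def endB (j0 : Nat) : List (Nat × Nat × Nat) → Nat
  | [] => j0
  | (_, j, k) :: rest => endB (j + k) rest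

-- j2len invariant: every entry was written at some b-index j in [blo, bhi) with a
-- match-length v bounded by both windows ('up' = the row bound)
def JInv (alo blo bhi up : Nat) (d : PySem.Dict Int Nat) : Prop :=
  ∀ z v, d.get? z = some v →
    ∃ j : Nat, z = (j : Nat) ∧ blo ≤ j ∧ j < bhi ∧ v + blo ≤ j + 1 ∧ v + alo ≤ up

-- best-triple invariant
def PInv (alo ahi blo bhi : Nat) (t : Nat × Nat × Nat) : Prop :=
  alo ≤ t.1 ∧ t.1 + t.2.2 ≤ ahi ∧ blo ≤ t.2.1 ∧ t.2.1 + t.2.2 ≤ bhi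

lemma dl_inner_inv (alo ahi blo bhi i : Nat) (j2len : PySem.Dict Int Nat)
    (hi : alo ≤ i) (hia : i < ahi)
    (hJ : JInv alo blo bhi i j2len) :
    ∀ (js : List Nat) (new : PySem.Dict Int Nat) (best : Nat × Nat × Nat),
      JInv alo blo bhi (i + 1) new → PInv alo ahi blo bhi best →
      JInv alo blo bhi (i + 1) (dl_inner blo bhi i j2len js new best).1 ∧
      PInv alo ahi blo bhi (dl_inner blo bhi i j2len js new best).2 := by
  intro js
  induction js with
  | nil => intro new best hN hP; exact ⟨hN, hP⟩
  | cons j js ih =>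
    intro new best hN hP
    by_cases hb1 : j < blo
    · simp only [dl_inner, if_pos hb1]; exact ih new best hN hP
    · by_cases hb2 : bhi ≤ j
      · simp only [dl_inner, if_neg hb1, if_pos hb2]; exact ⟨hN, hP⟩
      · simp only [dl_inner, if_neg hb1, if_neg hb2]
        have hkb : (j2len.getD ((j : Int) - 1) 0) + 1 + blo ≤ j + 1 ∧
            (j2len.getD ((j : Int) - 1) 0) + 1 + alo ≤ i + 1 := by
          rcases hg : j2len.get? ((j : Int) - 1) with _ | v
          · rw [PySem.Dict.getD_eq_get?_getD, hg]; simp; omega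
          · obtain ⟨jn, hz, hjb, hjb2, hv1, hv2⟩ := hJ _ _ hg
            have hj : j = jn + 1 := by omega
            rw [PySem.Dict.getD_eq_get?_getD, hg]; simp [Option.getD]; omega
        refine ih _ _ ?_ ?_
        · intro z v hzv
          rw [PySem.Dict.get?_insert] at hzv
          by_cases hz : z = (j : Int)
          · rw [if_pos hz] at hzv
            injection hzv with hv
            exact ⟨j, hz, by omega, by omega, by omega, by omega⟩
          · rw [if_neg hz] at hzv; exact hN z v hzv
        · dsimp only
          split_ifs with hbest
          · simp only [PInv]; omega
          · exact hP

lemma dl_extendL_inv (a b : List Char) (alo blo ahi bhi : Nat) :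
    ∀ (besti bestj bestsize : Nat), alo ≤ besti → blo ≤ bestj →
      besti + bestsize ≤ ahi → bestj + bestsize ≤ bhi →
      PInv alo ahi blo bhi (dl_extendL a b alo blo besti bestj bestsize) := by
  intro besti
  induction besti using Nat.strong_induction_on with
  | _ besti ihs =>
    intro bestj bestsize h1 h2 h3 h4
    rw [dl_extendL]
    split_ifs with h
    · exact ihs (besti - 1) (by omega) (bestj - 1) (bestsize + 1)
        (by omega) (by omega) (by omega) (by omega)
    · exact ⟨h1, h3, h2, h4⟩

lemma dl_extendR_inv (a b : List Char) (alo blo ahi bhi : Nat) :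
    ∀ (fuel besti bestj bestsize : Nat), ahi - (besti + bestsize) ≤ fuel →
      alo ≤ besti → blo ≤ bestj → besti + bestsize ≤ ahi → bestj + bestsize ≤ bhi →
      PInv alo ahi blo bhi (dl_extendR a b ahi bhi besti bestj bestsize) := by
  intro fuel
  induction fuel with
  | zero =>
    intro besti bestj bestsize hf h1 h2 h3 h4
    rw [dl_extendR]
    split_ifs with h
    · exact absurd h.1 (by omega)
    · exact ⟨h1, h3, h2, h4⟩
  | succ fuel ih =>
    intro besti bestj bestsize hf h1 h2 h3 h4
    rw [dl_extendR]
    split_ifs with h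
    · exact ih besti bestj (bestsize + 1) (by omega) h1 h2 (by omega) (by omega)
    · exact ⟨h1, h3, h2, h4⟩

lemma dl_outer_inv (a : List Char) (d : PySem.Dict Char (List Nat)) (alo ahi blo bhi : Nat) :
    ∀ (n s : Nat) (st : PySem.Dict Int Nat × (Nat × Nat × Nat)), alo ≤ s → s + n = ahi →
      JInv alo blo bhi s st.1 → PInv alo ahi blo bhi st.2 →
      JInv alo blo bhi ahi (((List.range' s n).foldl
        (fun (st : PySem.Dict Int Nat × (Nat × Nat × Nat)) i =>
          dl_inner blo bhi i st.1 (d.getD (a.getD i ' ') []) PySem.Dict.empty st.2) st)).1 ∧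
      PInv alo ahi blo bhi (((List.range' s n).foldl
        (fun (st : PySem.Dict Int Nat × (Nat × Nat × Nat)) i =>
          dl_inner blo bhi i st.1 (d.getD (a.getD i ' ') []) PySem.Dict.empty st.2) st)).2 := by
  intro n
  induction n with
  | zero =>
    intro s st hs hsum hJ hP
    simp only [List.range', List.foldl_nil]
    exact ⟨fun z v h => by obtain ⟨j, h1, h2, h3, h4, h5⟩ := hJ z v h; exact ⟨j, h1, h2, h3, h4, by omega⟩, hP⟩
  | succ n ih =>
    intro s st hs hsum hJ hP
    rw [List.range'_succ, List.foldl_cons]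
    have hstep := dl_inner_inv alo ahi blo bhi s st.1 hs (by omega) hJ
      (d.getD (a.getD s ' ') []) PySem.Dict.empty st.2
      (fun z v h => by rw [PySem.Dict.get?_empty] at h; exact absurd h (by simp))
      hP
    exact ih (s + 1) _ (by omega) (by omega) hstep.1 hstep.2

lemma dl_flm_bounds (a b : List Char) (d : PySem.Dict Char (List Nat))
    (alo ahi blo bhi : Nat) (h1 : alo ≤ ahi) (h2 : blo ≤ bhi) :
    PInv alo ahi blo bhi (dl_flm a b d alo ahi blo bhi) := by
  unfold dl_flm
  have hout := dl_outer_inv a d alo ahi blo bhi (ahi - alo) alo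
    (PySem.Dict.empty, (alo, blo, 0)) le_rfl (by omega)
    (fun z v h => by rw [PySem.Dict.get?_empty] at h; exact absurd h (by simp))
    ⟨le_rfl, by omega, le_rfl, by omega⟩
  obtain ⟨-, hP⟩ := hout
  generalize hst : (List.range' alo (ahi - alo)).foldl
      (fun (st : PySem.Dict Int Nat × (Nat × Nat × Nat)) i =>
        dl_inner blo bhi i st.1 (d.getD (a.getD i ' ') []) PySem.Dict.empty st.2)
      (PySem.Dict.empty, (alo, blo, 0)) = st at hP ⊢
  obtain ⟨d1, bi, bj, bk⟩ := st
  obtain ⟨q1, q2, q3, q4⟩ := hP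
  dsimp only at q1 q2 q3 q4 ⊢
  have hL := dl_extendL_inv a b alo blo ahi bhi bi bj bk q1 q3 q2 q4
  rcases hLe : dl_extendL a b alo blo bi bj bk with ⟨ci, cj, ck⟩
  rw [hLe] at hL
  exact dl_extendR_inv a b alo blo ahi bhi (ahi - (ci + ck)) ci cj ck le_rfl
    hL.1 hL.2.2.1 hL.2.1 hL.2.2.2

lemma chainB_mono {i0 j0 i1 j1 ihi jhi : Nat} {bs : List (Nat × Nat × Nat)}
    (hi : i0 ≤ i1) (hj : j0 ≤ j1) (h : ChainB i1 j1 ihi jhi bs) :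
    ChainB i0 j0 ihi jhi bs := by
  cases bs with
  | nil => exact ⟨le_trans hi h.1, le_trans hj h.2⟩
  | cons hd tl =>
    obtain ⟨i, j, k⟩ := hd
    exact ⟨le_trans hi h.1, le_trans hj h.2.1, h.2.2⟩

lemma chainB_append {i0 j0 i1 j1 ihi jhi : Nat} {bs1 bs2 : List (Nat × Nat × Nat)}
    (h1 : ChainB i0 j0 i1 j1 bs1) (h2 : ChainB i1 j1 ihi jhi bs2) :
    ChainB i0 j0 ihi jhi (bs1 ++ bs2) := by
  induction bs1 generalizing i0 j0 with
  | nil => exact chainB_mono h1.1 h1.2 h2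
  | cons hd tl ih =>
    obtain ⟨i, j, k⟩ := hd
    exact ⟨h1.1, h1.2.1, ih h1.2.2⟩

lemma dl_matchRec_chain (a b : List Char) (d : PySem.Dict Char (List Nat)) :
    ∀ (fuel alo ahi blo bhi : Nat), alo ≤ ahi → blo ≤ bhi →
      ChainB alo blo ahi bhi (dl_matchRec a b d fuel alo ahi blo bhi) := by
  intro fuel
  induction fuel with
  | zero => intro alo ahi blo bhi h1 h2; exact ⟨h1, h2⟩
  | succ fuel ih =>
    intro alo ahi blo bhi h1 h2
    have hb := dl_flm_bounds a b d alo ahi blo bhi h1 h2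
    rcases hfl : dl_flm a b d alo ahi blo bhi with ⟨i, j, k⟩
    rw [hfl] at hb
    obtain ⟨hb1, hb2, hb3, hb4⟩ := hb
    simp only [dl_matchRec, hfl]
    by_cases hk : k = 0
    · simp only [if_pos hk]; exact ⟨h1, h2⟩
    · simp only [if_neg hk]
      have hL : ChainB alo blo i j
          (if alo < i ∧ blo < j then dl_matchRec a b d fuel alo i blo j else []) := by
        split_ifs with hg
        · exact ih alo i blo j (le_of_lt hg.1) (le_of_lt hg.2)
        · exact ⟨hb1, hb3⟩
      have hR : ChainB (i + k) (j + k) ahi bhi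
          (if i + k < ahi ∧ j + k < bhi then dl_matchRec a b d fuel (i + k) ahi (j + k) bhi else []) := by
        split_ifs with hg
        · exact ih (i + k) ahi (j + k) bhi (le_of_lt hg.1) (le_of_lt hg.2)
        · exact ⟨hb2, hb4⟩
      rw [List.append_assoc, List.singleton_append]
      exact chainB_append (i1 := i) (j1 := j) hL ⟨le_rfl, le_rfl, hR⟩

lemma dl_merge_chain (la lb : Nat) :
    ∀ (bs : List (Nat × Nat × Nat)) (i1 j1 k1 i0 j0 : Nat), i0 ≤ i1 → j0 ≤ j1 →
      ChainB (i1 + k1) (j1 + k1) la lb bs →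
      ChainB i0 j0 la lb (dl_merge i1 j1 k1 bs) ∧
      sumK (dl_merge i1 j1 k1 bs) = k1 + sumK bs := by
  intro bs
  induction bs with
  | nil =>
    intro i1 j1 k1 i0 j0 hi hj hc
    obtain ⟨hc1, hc2⟩ := hc
    simp only [dl_merge]
    split_ifs with hk
    · exact ⟨⟨hi, hj, hc1, hc2⟩, by simp [sumK]⟩
    · exact ⟨⟨by omega, by omega⟩, by simp [sumK]; omega⟩
  | cons hd bs ih =>
    intro i1 j1 k1 i0 j0 hi hj hc
    obtain ⟨i2, j2, k2⟩ := hd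
    obtain ⟨hc1, hc2, hc3⟩ := hc
    simp only [dl_merge]
    split_ifs with ha hk
    · have := ih i1 j1 (k1 + k2) i0 j0 hi hj
        (by rw [show i1 + (k1 + k2) = i2 + k2 by omega, show j1 + (k1 + k2) = j2 + k2 by omega]; exact hc3)
      exact ⟨this.1, by rw [this.2]; simp [sumK]; omega⟩
    · have := ih i2 j2 k2 (i1 + k1) (j1 + k1) hc1 hc2 hc3
      exact ⟨⟨hi, hj, this.1⟩, by simp [sumK, this.2]⟩
    · have := ih i2 j2 k2 i0 j0 (by omega) (by omega) hc3
      simp only [List.nil_append]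
      exact ⟨this.1, by simp [sumK, this.2]; omega⟩

-- the opcode tag-fold of port A (opF names its fold body, definitionally)
def opF : Nat × Nat → (String × Nat × Nat × Nat × Nat) → Nat × Nat :=
  fun (s : Nat × Nat) op =>
    let (ins, del) := s
    let (tag, i1, i2, j1, j2) := op
    if tag = "replace" then (ins + (j2 - j1), del + (i2 - i1))
    else if tag = "delete" then (ins, del + (i2 - i1))
    else if tag = "insert" then (ins + (j2 - j1), del)
    else (ins, del)

lemma fold_opcodes (la lb : Nat) :
    ∀ (bs : List (Nat × Nat × Nat)) (i0 j0 ins del : Nat), ChainB i0 j0 la lb bs →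
      ((dl_opcodes i0 j0 bs).foldl opF (ins, del)).1 + j0 + sumK bs = ins + endB j0 bs ∧
      ((dl_opcodes i0 j0 bs).foldl opF (ins, del)).2 + i0 + sumK bs = del + endA i0 bs := by
  intro bs
  induction bs with
  | nil => intro i0 j0 ins del _; simp [dl_opcodes, sumK, endA, endB]
  | cons hd rest ih =>
    intro i0 j0 ins del hc
    obtain ⟨i, j, k⟩ := hd
    obtain ⟨hc1, hc2, hc3⟩ := hc
    have hstep : dl_opcodes i0 j0 ((i, j, k) :: rest) =
        ((if i0 < i ∧ j0 < j then [(("replace" : String), i0, i, j0, j)]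
          else if i0 < i then [("delete", i0, i, j0, j)]
          else if j0 < j then [("insert", i0, i, j0, j)] else [])
         ++ ((if k ≠ 0 then [(("equal" : String), i, i + k, j, j + k)] else [])
         ++ dl_opcodes (i + k) (j + k) rest)) := by
      simp only [dl_opcodes, List.append_assoc]
      split_ifs <;> simp_all
    rw [hstep, List.foldl_append, List.foldl_append]
    have hs1 : ((if i0 < i ∧ j0 < j then [(("replace" : String), i0, i, j0, j)]
          else if i0 < i then [("delete", i0, i, j0, j)]
          else if j0 < j then [("insert", i0, i, j0, j)] else []).foldl opF (ins, del))
        = (ins + (j - j0), del + (i - i0)) := by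
      split_ifs with h1 h2 h3 <;>
        simp only [List.foldl_cons, List.foldl_nil, opF, String.reduceEq,
          Prod.mk.injEq, if_true, if_false]
      all_goals exact ⟨by first | trivial | omega, by first | trivial | omega⟩
    have hs2 : ((if k ≠ 0 then [(("equal" : String), i, i + k, j, j + k)] else []).foldl opF
          (ins + (j - j0), del + (i - i0)))
        = (ins + (j - j0), del + (i - i0)) := by
      split_ifs <;>
        simp only [List.foldl_cons, List.foldl_nil, opF, String.reduceEq, reduceIte]
    rw [hs1, hs2]
    have hrec := ih (i + k) (j + k) (ins + (j - j0)) (del + (i - i0)) hc3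
    simp only [sumK, endA, endB]
    omega

lemma endA_append_last (bs : List (Nat × Nat × Nat)) (i0 x y k : Nat) :
    endA i0 (bs ++ [(x, y, k)]) = x + k := by
  induction bs generalizing i0 with
  | nil => rfl
  | cons hd tl ih => obtain ⟨i, j, kk⟩ := hd; simpa [endA] using ih (i + kk)

lemma endB_append_last (bs : List (Nat × Nat × Nat)) (j0 x y k : Nat) :
    endB j0 (bs ++ [(x, y, k)]) = y + k := by
  induction bs generalizing j0 with
  | nil => rfl
  | cons hd tl ih => obtain ⟨i, j, kk⟩ := hd; simpa [endB] using ih (j + kk)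

lemma blocks_chain (a b : List Char) :
    ChainB 0 0 a.length b.length (dl_getMatchingBlocks a b) := by
  unfold dl_getMatchingBlocks
  refine chainB_append (i1 := a.length) (j1 := b.length) ?_ ?_
  · exact (dl_merge_chain a.length b.length _ 0 0 0 0 0 le_rfl le_rfl
      (dl_matchRec_chain a b (dl_b2j b) (a.length + 1) 0 a.length 0 b.length
        (Nat.zero_le _) (Nat.zero_le _))).1
  · exact ⟨le_rfl, le_rfl, Nat.le_of_eq (Nat.add_zero _), Nat.le_of_eq (Nat.add_zero _)⟩

-- === the equal-strings case: the matcher matches everything, so B's closed form gives (0,0) ===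

-- b2j lookups are the filtered index list of the character
lemma b2j_getD (a : List Char) (c : Char) :
    (dl_b2j a).getD c [] = (a.zipIdx.filter (fun p => p.1 == c)).map (·.2) := by
  simpa [dl_b2j] using
    PySem.Dict.getD_foldl_modify_append a.zipIdx PySem.Dict.empty c

lemma b2j_mem_lt (a : List Char) (c : Char) :
    ∀ j ∈ (dl_b2j a).getD c [], j < a.length := by
  intro j hj
  rw [b2j_getD] at hj
  obtain ⟨p, hp, rfl⟩ := List.mem_map.mp hj
  exact (List.snd_lt_add_of_mem_zipIdx (List.mem_of_mem_filter hp)).trans_le (by omega)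

lemma b2j_self_mem (a : List Char) (i : Nat) (hi : i < a.length) :
    i ∈ (dl_b2j a).getD (a.getD i ' ') [] := by
  rw [b2j_getD]
  refine List.mem_map.mpr ⟨(a.getD i ' ', i), List.mem_filter.mpr ⟨?_, by simp⟩, rfl⟩
  have : a.getD i ' ' = a[i] := List.getD_eq_getElem a ' ' hi
  rw [this]
  exact List.mem_zipIdx_iff_getElem?.mpr (by simp)

lemma b2j_sorted (a : List Char) (c : Char) :
    ((dl_b2j a).getD c []).Pairwise (· < ·) := by
  rw [b2j_getD]
  have hsub : (a.zipIdx.filter (fun p => p.1 == c)).Sublist a.zipIdx :=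
    List.filter_sublist
  have hmapped : (a.zipIdx.map Prod.snd).Pairwise (· < ·) := by
    rw [List.zipIdx_map_snd]
    exact List.pairwise_lt_range'
  exact List.pairwise_map.mpr (List.Pairwise.sublist hsub (List.pairwise_map.mp hmapped))

-- best size never shrinks through the inner loop
lemma dl_inner_best_mono (blo bhi i : Nat) (j2len : PySem.Dict Int Nat) :
    ∀ (js : List Nat) (new : PySem.Dict Int Nat) (best : Nat × Nat × Nat),
      best.2.2 ≤ (dl_inner blo bhi i j2len js new best).2.2.2 := by
  intro js
  induction js with
  | nil => intro new best; exact le_rfl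
  | cons j js ih =>
    intro new best
    by_cases hb1 : j < blo
    · simp only [dl_inner, if_pos hb1]; exact ih new best
    · by_cases hb2 : bhi ≤ j
      · simp only [dl_inner, if_neg hb1, if_pos hb2]; exact le_rfl
      · simp only [dl_inner, if_neg hb1, if_neg hb2]
        refine le_trans ?_ (ih _ _)
        dsimp only
        split_ifs with h
        · exact le_of_lt (lt_of_lt_of_le h le_rfl)
        · exact le_rfl

-- processing a row containing i (blo = 0, all indices < bhi) pushes best past j2len[i-1]+1
lemma dl_inner_best_diag (bhi i : Nat) (j2len : PySem.Dict Int Nat) :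
    ∀ (js : List Nat) (new : PySem.Dict Int Nat) (best : Nat × Nat × Nat),
      (∀ j ∈ js, j < bhi) → i ∈ js →
      j2len.getD ((i : Int) - 1) 0 + 1 ≤ (dl_inner 0 bhi i j2len js new best).2.2.2 := by
  intro js
  induction js with
  | nil => intro _ _ _ hmem; simp at hmem
  | cons j js ih =>
    intro new best hlt hmem
    have hb1 : ¬ (j < 0) := by omega
    have hb2 : ¬ (bhi ≤ j) := by have := hlt j (by simp); omega
    simp only [dl_inner, if_neg hb1, if_neg hb2]
    rcases List.mem_cons.mp hmem with hij | hmem'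
    · subst hij
      refine le_trans ?_ (dl_inner_best_mono 0 bhi i j2len js _ _)
      dsimp only
      split_ifs with h
      · exact le_rfl
      · omega
    · exact ih _ _ (fun x hx => hlt x (by simp [hx])) hmem'

-- the inner loop never touches keys outside its index list
lemma dl_inner_get?_frozen (blo bhi i : Nat) (j2len : PySem.Dict Int Nat) :
    ∀ (js : List Nat) (new : PySem.Dict Int Nat) (best : Nat × Nat × Nat) (key : Int),
      (∀ j ∈ js, (j : Int) ≠ key) →
      ((dl_inner blo bhi i j2len js new best).1).get? key = new.get? key := by
  intro js
  induction js with
  | nil => intro new best key _; rfl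
  | cons j js ih =>
    intro new best key hne
    by_cases hb1 : j < blo
    · simp only [dl_inner, if_pos hb1]; exact ih _ _ _ (fun x hx => hne x (by simp [hx]))
    · by_cases hb2 : bhi ≤ j
      · simp only [dl_inner, if_neg hb1, if_pos hb2]
      · simp only [dl_inner, if_neg hb1, if_neg hb2]
        rw [ih _ _ _ (fun x hx => hne x (by simp [hx]))]
        exact PySem.Dict.get?_insert_of_ne _ _ (fun h => hne j (by simp) h.symm)

-- processing a row containing i writes j2len[i-1]+1 at key i (and it persists: later
-- indices of the strictly sorted list are all ≠ i)
lemma dl_inner_diag (bhi i : Nat) (j2len : PySem.Dict Int Nat) :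
    ∀ (js : List Nat) (new : PySem.Dict Int Nat) (best : Nat × Nat × Nat),
      (∀ j ∈ js, j < bhi) → i ∈ js → js.Pairwise (· < ·) →
      j2len.getD ((i : Int) - 1) 0 + 1 ≤ ((dl_inner 0 bhi i j2len js new best).1).getD (i : Int) 0 := by
  intro js
  induction js with
  | nil => intro _ _ _ hmem; simp at hmem
  | cons j js ih =>
    intro new best hlt hmem hpw
    have hb1 : ¬ (j < 0) := by omega
    have hb2 : ¬ (bhi ≤ j) := by have := hlt j (by simp); omega
    simp only [dl_inner, if_neg hb1, if_neg hb2]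
    rcases List.mem_cons.mp hmem with hij | hmem'
    · subst hij
      have hne : ∀ x ∈ js, (x : Int) ≠ (i : Int) := fun x hx h => by
        have := (List.pairwise_cons.mp hpw).1 x hx
        exact absurd (Int.ofNat_inj.mp h) (by omega)
      have key : ∀ (new' : PySem.Dict Int Nat) (best' : Nat × Nat × Nat),
          ((dl_inner 0 bhi i j2len js new' best').1).getD (i : Int) 0 = new'.getD (i : Int) 0 := by
        intro new' best'
        rw [PySem.Dict.getD_eq_get?_getD, dl_inner_get?_frozen 0 bhi i j2len js new' best' _ hne,
          ← PySem.Dict.getD_eq_get?_getD]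
      rw [key, PySem.Dict.getD_insert_self]
    · exact ih _ _ (fun x hx => hlt x (by simp [hx])) hmem' (List.pairwise_cons.mp hpw).2

-- along the diagonal of a self-comparison the best size reaches the full length
lemma dl_outer_diag (a : List Char) :
    ∀ (n s : Nat) (st : PySem.Dict Int Nat × (Nat × Nat × Nat)), s + n = a.length →
      s ≤ st.1.getD ((s : Int) - 1) 0 → s ≤ st.2.2.2 →
      a.length ≤ (((List.range' s n).foldl
        (fun (st : PySem.Dict Int Nat × (Nat × Nat × Nat)) i =>
          dl_inner 0 a.length i st.1 ((dl_b2j a).getD (a.getD i ' ') []) PySem.Dict.empty st.2) st)).2.2.2 := by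
  intro n
  induction n with
  | zero =>
    intro s st hsum hd hb
    simp only [List.range', List.foldl_nil]
    omega
  | succ n ih =>
    intro s st hsum hd hb
    rw [List.range'_succ, List.foldl_cons]
    have hs : s < a.length := by omega
    have hmem := b2j_self_mem a s hs
    have hlt := b2j_mem_lt a (a.getD s ' ')
    have hpw := b2j_sorted a (a.getD s ' ')
    refine ih (s + 1) _ (by omega) ?_ ?_
    · have := dl_inner_diag a.length s st.1 ((dl_b2j a).getD (a.getD s ' ') [])
        PySem.Dict.empty st.2 hlt hmem hpw
      have hcast : ((s + 1 : Nat) : Int) - 1 = (s : Int) := by push_cast; ring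
      rw [hcast]
      omega
    · have := dl_inner_best_diag a.length s st.1 ((dl_b2j a).getD (a.getD s ' ') [])
        PySem.Dict.empty st.2 hlt hmem
      omega

lemma dl_flm_self (a : List Char) :
    dl_flm a a (dl_b2j a) 0 a.length 0 a.length = (0, 0, a.length) := by
  have hP := dl_flm_bounds a a (dl_b2j a) 0 a.length 0 a.length (Nat.zero_le _) (Nat.zero_le _)
  unfold dl_flm at hP ⊢
  have hdiag := dl_outer_diag a a.length 0 (PySem.Dict.empty, (0, 0, 0)) (by omega)
    (by rw [PySem.Dict.getD_eq_get?_getD, PySem.Dict.get?_empty]; simp)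
    (by omega)
  simp only [Nat.sub_zero] at hP hdiag ⊢
  generalize hst : (List.range' 0 a.length).foldl
      (fun (st : PySem.Dict Int Nat × (Nat × Nat × Nat)) i =>
        dl_inner 0 a.length i st.1 ((dl_b2j a).getD (a.getD i ' ') []) PySem.Dict.empty st.2)
      (PySem.Dict.empty, (0, 0, 0)) = st at hdiag hP ⊢
  obtain ⟨d1, bi, bj, bk⟩ := st
  dsimp only at hdiag hP ⊢
  -- before the extension loops the best is already (0, 0, a.length)
  have hout := dl_outer_inv a (dl_b2j a) 0 a.length 0 a.length a.length 0
    (PySem.Dict.empty, (0, 0, 0)) le_rfl (by omega)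
    (fun z v h => by rw [PySem.Dict.get?_empty] at h; exact absurd h (by simp))
    ⟨le_rfl, by simp, le_rfl, by simp⟩
  rw [hst] at hout
  obtain ⟨-, q1, q2, q3, q4⟩ := hout
  dsimp only at q1 q2 q3 q4
  have hbi : bi = 0 := by omega
  have hbj : bj = 0 := by omega
  have hbk : bk = a.length := by omega
  subst hbi hbj hbk
  simp [dl_extendL, dl_extendR]

lemma sumK_blocks_self (a : List Char) :
    sumK (dl_getMatchingBlocks a a) = a.length := by
  by_cases h0 : a.length = 0
  · obtain rfl := List.length_eq_zero_iff.mp h0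
    have h' := dl_flm_self ([] : List Char)
    simp only [List.length_nil] at h'
    simp [dl_getMatchingBlocks, dl_matchRec, h', dl_merge, sumK]
  · unfold dl_getMatchingBlocks
    have hrec : dl_matchRec a a (dl_b2j a) (a.length + 1) 0 a.length 0 a.length
        = [(0, 0, a.length)] := by
      simp [dl_matchRec, dl_flm_self, h0]
    rw [hrec]
    have hmerge : dl_merge 0 0 0 [(0, 0, a.length)] = [(0, 0, a.length)] := by
      simp [dl_merge, h0]
    rw [hmerge]
    simp [sumK]

-- === B-side equivalence: both rows are the same abstract fold over run lengths ===

-- runW i j: length of the common run of a and b ending at (i, j), windowed at (alo, blo)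
def runW (a b : List Char) (alo blo : Nat) : Nat → Nat → Nat := fun i j =>
  if a.getD i ' ' = b.getD j ' ' ∧ alo ≤ i ∧ blo ≤ j then
    if alo < i ∧ blo < j then runW a b alo blo (i - 1) (j - 1) + 1 else 1
  else 0
termination_by i => i
decreasing_by omega

-- value of the previous DP row at column j (0 before any row is processed)
def prevV (a b : List Char) (alo blo i j : Nat) : Nat :=
  if i ≤ alo then 0 else runW a b alo blo (i - 1) j

-- the shared best-update step of both row loops
def updB (a b : List Char) (alo blo i : Nat) (best : Nat × Nat × Nat) (j : Nat) : Nat × Nat × Nat :=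
  let k := runW a b alo blo i j
  if best.2.2 < k then (i + 1 - k, j + 1 - k, k) else best

-- the matched in-window columns of row i, ascending
def jsW (a b : List Char) (blo bhi i : Nat) : List Nat :=
  (List.range' blo (bhi - blo)).filter (fun j => a.getD i ' ' == b.getD j ' ')

lemma runW_pos_facts (a b : List Char) (alo blo : Nat) :
    ∀ i j, 1 ≤ runW a b alo blo i j →
      a.getD i ' ' = b.getD j ' ' ∧ alo ≤ i ∧ blo ≤ j ∧
      runW a b alo blo i j + alo ≤ i + 1 ∧ runW a b alo blo i j + blo ≤ j + 1 := by
  intro i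
  induction i using Nat.strong_induction_on with
  | _ i ih =>
    intro j h
    rw [runW] at h ⊢
    split_ifs at h ⊢ with h1 h2
    · have hrec := ih (i - 1) (by omega) (j - 1)
      by_cases hz : 1 ≤ runW a b alo blo (i - 1) (j - 1)
      · obtain ⟨-, -, -, q1, q2⟩ := hrec hz
        exact ⟨h1.1, h1.2.1, h1.2.2, by omega, by omega⟩
      · have : runW a b alo blo (i - 1) (j - 1) = 0 := by omega
        rw [this]
        exact ⟨h1.1, h1.2.1, h1.2.2, by omega, by omega⟩
    · exact ⟨h1.1, h1.2.1, h1.2.2, by omega, by omega⟩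
    · omega

lemma runW_pos (a b : List Char) (alo blo i j : Nat)
    (h : a.getD i ' ' = b.getD j ' ' ∧ alo ≤ i ∧ blo ≤ j) :
    1 ≤ runW a b alo blo i j := by
  rw [runW, if_pos h]
  split_ifs <;> omega

lemma runW_diag (a b : List Char) (alo blo : Nat) :
    ∀ i j t, t < runW a b alo blo i j →
      a.getD (i - t) ' ' = b.getD (j - t) ' ' ∧ t ≤ i ∧ t ≤ j ∧
      alo ≤ i - t ∧ blo ≤ j - t := by
  intro i
  induction i using Nat.strong_induction_on with
  | _ i ih =>
    intro j t ht
    rw [runW] at ht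
    split_ifs at ht with h1 h2
    · match t with
      | 0 => exact ⟨h1.1, by omega, by omega, by simpa using h1.2.1, by simpa using h1.2.2⟩
      | t + 1 =>
        obtain ⟨hchar, hb2, hb3, hb4, hb5⟩ := ih (i - 1) (by omega) (j - 1) t (by omega)
        have e1 : i - (t + 1) = i - 1 - t := by omega
        have e3 : j - (t + 1) = j - 1 - t := by omega
        exact ⟨by rw [e1, e3]; exact hchar, by omega, by omega,
          by rw [e1]; exact hb4, by rw [e3]; exact hb5⟩
    · interval_cases t
      exact ⟨h1.1, by omega, by omega, by simpa using h1.2.1, by simpa using h1.2.2⟩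
    · omega

lemma runW_lower (a b : List Char) (alo blo : Nat) :
    ∀ T i j, (∀ t, t ≤ T → a.getD (i - t) ' ' = b.getD (j - t) ' ') →
      T ≤ i → T ≤ j → alo ≤ i - T → blo ≤ j - T →
      T + 1 ≤ runW a b alo blo i j := by
  intro T
  induction T with
  | zero =>
    intro i j hc _ _ h4 h5
    exact runW_pos a b alo blo i j ⟨by simpa using hc 0 (by omega), by simpa using h4, by simpa using h5⟩
  | succ T ih =>
    intro i j hc hti htj h4 h5
    have hstep : runW a b alo blo i j = runW a b alo blo (i - 1) (j - 1) + 1 := by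
      rw [runW, if_pos ⟨by simpa using hc 0 (by omega), by omega, by omega⟩,
        if_pos ⟨by omega, by omega⟩]
    rw [hstep]
    have := ih (i - 1) (j - 1)
      (fun t htT => by
        have := hc (t + 1) (by omega)
        have e1 : i - (t + 1) = i - 1 - t := by omega
        have e2 : j - (t + 1) = j - 1 - t := by omega
        rwa [e1, e2] at this)
      (by omega) (by omega) (by omega) (by omega)
    omega

lemma sumK_append (l1 l2 : List (Nat × Nat × Nat)) : sumK (l1 ++ l2) = sumK l1 + sumK l2 := by
  induction l1 with
  | nil => simp [sumK]
  | cons hd tl ih => obtain ⟨x, y, z⟩ := hd; simp [sumK, ih]; omega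

-- dictionary invariant: the j2len dict holds exactly the nonzero previous-row values
def DIv (a b : List Char) (alo blo bhi i : Nat) (d : PySem.Dict Int Nat) : Prop :=
  (∀ z v, d.get? z = some v →
    ∃ j : Nat, z = (j : Int) ∧ blo ≤ j ∧ j < bhi ∧ v = prevV a b alo blo i j ∧ 1 ≤ v) ∧
  (∀ j : Nat, blo ≤ j → j < bhi → 1 ≤ prevV a b alo blo i j →
    d.get? (j : Int) = some (prevV a b alo blo i j))

lemma DIv_getD_in (a b : List Char) (alo blo bhi i : Nat) (d : PySem.Dict Int Nat)
    (h : DIv a b alo blo bhi i d) (j : Nat) (h1 : blo ≤ j) (h2 : j < bhi) :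
    d.getD (j : Int) 0 = prevV a b alo blo i j := by
  by_cases hp : 1 ≤ prevV a b alo blo i j
  · rw [PySem.Dict.getD_eq_get?_getD, h.2 j h1 h2 hp, Option.getD_some]
  · rcases hg : d.get? (j : Int) with _ | v
    · rw [PySem.Dict.getD_eq_get?_getD, hg, Option.getD_none]; omega
    · obtain ⟨j', he, -, -, hv, hv1⟩ := h.1 _ _ hg
      have : j' = j := by exact_mod_cast he.symm
      subst this
      omega

lemma DIv_getD_out (a b : List Char) (alo blo bhi i : Nat) (d : PySem.Dict Int Nat)
    (h : DIv a b alo blo bhi i d) (z : Int)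
    (hz : ∀ j : Nat, z = (j : Int) → ¬(blo ≤ j ∧ j < bhi)) :
    d.getD z 0 = 0 := by
  rcases hg : d.get? z with _ | v
  · rw [PySem.Dict.getD_eq_get?_getD, hg, Option.getD_none]
  · obtain ⟨j, he, hj1, hj2, -, -⟩ := h.1 _ _ hg
    exact absurd ⟨hj1, hj2⟩ (hz j he)

-- list invariant: the rolling row holds the previous-row values
def LIv (a b : List Char) (alo blo : Nat) (width i : Nat) (prev : List Nat) : Prop :=
  prev.length = width ∧ ∀ idx, idx < width → prev.getD idx 0 = prevV a b alo blo i (blo + idx)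

-- the k computed by A's inner loop is the current run length
lemma kA_eq (a b : List Char) (alo blo bhi i : Nat) (d : PySem.Dict Int Nat)
    (hDI : DIv a b alo blo bhi i d) (j : Nat)
    (hm : a.getD i ' ' = b.getD j ' ') (hi : alo ≤ i) (hjl : blo ≤ j) (hjh : j < bhi) :
    d.getD ((j : Int) - 1) 0 + 1 = runW a b alo blo i j := by
  have hW : runW a b alo blo i j =
      if alo < i ∧ blo < j then runW a b alo blo (i - 1) (j - 1) + 1 else 1 := by
    rw [runW, if_pos ⟨hm, hi, hjl⟩]
  by_cases hj0 : blo < j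
  · -- key j - 1 with blo ≤ j - 1 < bhi
    have hkey : ((j : Int) - 1) = ((j - 1 : Nat) : Int) := by omega
    rw [hkey, DIv_getD_in a b alo blo bhi i d hDI (j - 1) (by omega) (by omega)]
    unfold prevV
    by_cases hia : i ≤ alo
    · rw [if_pos hia, hW, if_neg (by omega)]
    · rw [if_neg hia, hW, if_pos ⟨by omega, hj0⟩]
  · -- j = blo: the looked-up key is outside the window (or negative)
    have hz : d.getD ((j : Int) - 1) 0 = 0 := by
      apply DIv_getD_out a b alo blo bhi i d hDI
      intro j' he hwin
      omega
    rw [hz, hW, if_neg (by omega)]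

-- the k computed by B's inner loop is the current run length
lemma kB_eq (a b : List Char) (alo blo bhi i : Nat) (prev : List Nat)
    (hLI : LIv a b alo blo (bhi - blo) i prev) (idx : Nat) (hidx : idx < bhi - blo)
    (hm : a.getD i ' ' = b.getD (blo + idx) ' ') (hi : alo ≤ i) :
    (if idx = 0 then 1 else prev.getD (idx - 1) 0 + 1) = runW a b alo blo i (blo + idx) := by
  have hW : runW a b alo blo i (blo + idx) =
      if alo < i ∧ blo < blo + idx then runW a b alo blo (i - 1) (blo + idx - 1) + 1 else 1 := by
    rw [runW, if_pos ⟨hm, hi, by omega⟩]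
  by_cases h0 : idx = 0
  · rw [if_pos h0, hW, if_neg (by omega)]
  · rw [if_neg h0, hLI.2 (idx - 1) (by omega)]
    unfold prevV
    by_cases hia : i ≤ alo
    · rw [if_pos hia, hW, if_neg (by omega)]
    · rw [if_neg hia, hW, if_pos ⟨by omega, by omega⟩]
      have : blo + (idx - 1) = blo + idx - 1 := by omega
      rw [this]

-- b2j as a filtered range of column indices
lemma zipIdx_filter_map (c : Char) :
    ∀ (l : List Char) (n : Nat),
      ((l.zipIdx n).filter (fun p => p.1 == c)).map Prod.snd
        = (List.range' n l.length).filter (fun j => l.getD (j - n) ' ' == c) := by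
  intro l
  induction l with
  | nil => intro n; simp
  | cons x xs ih =>
    intro n
    rw [List.zipIdx_cons]
    have hr : List.range' n (x :: xs).length = n :: List.range' (n + 1) xs.length := by
      simp [List.range'_succ]
    rw [hr, List.filter_cons, List.filter_cons]
    have htl : (List.range' (n + 1) xs.length).filter
          (fun j => (x :: xs).getD (j - n) ' ' == c)
        = (List.range' (n + 1) xs.length).filter (fun j => xs.getD (j - (n + 1)) ' ' == c) := by
      apply List.filter_congr
      intro j hj
      have hjn : n + 1 ≤ j := (List.mem_range'_1.mp hj).1
      have e : j - n = (j - (n + 1)) + 1 := by omega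
      rw [e]
      rfl
    have hh : ((x :: xs).getD (n - n) ' ' == c) = (x == c) := by
      simp
    cases hc : (x == c) with
    | false =>
      simp only [hc, hh, Bool.false_eq_true, if_false]
      rw [htl, ih (n + 1)]
    | true =>
      simp only [hc, hh, if_true]
      rw [htl, List.map_cons, ih (n + 1)]

lemma b2j_range (b : List Char) (c : Char) :
    (dl_b2j b).getD c [] = (List.range' 0 b.length).filter (fun j => b.getD j ' ' == c) := by
  rw [b2j_getD]
  have := zipIdx_filter_map c b 0
  simpa using this

-- the in-window filter of a b2j list is exactly jsW
lemma b2j_window (a b : List Char) (blo bhi i : Nat) (hbl : bhi ≤ b.length) (hw : blo ≤ bhi) :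
    ((dl_b2j b).getD (a.getD i ' ') []).filter (fun j => decide (blo ≤ j) && decide (j < bhi))
      = jsW a b blo bhi i := by
  rw [b2j_range, List.filter_filter, jsW]
  have hsplit : List.range' 0 b.length
      = (List.range' 0 blo ++ List.range' blo (bhi - blo)) ++ List.range' bhi (b.length - bhi) := by
    have e1 : List.range' 0 blo ++ List.range' (0 + blo) (bhi - blo) = List.range' 0 bhi := by
      rw [List.range'_append_1]
      congr 1
      omega
    have e2 : List.range' 0 bhi ++ List.range' (0 + bhi) (b.length - bhi) = List.range' 0 b.length := by
      rw [List.range'_append_1]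
      congr 1
      omega
    simp only [Nat.zero_add] at e1 e2
    rw [← e2, ← e1]
  rw [hsplit, List.filter_append, List.filter_append]
  have h1 : (List.range' 0 blo).filter
      (fun j => (decide (blo ≤ j) && decide (j < bhi)) && (b.getD j ' ' == a.getD i ' ')) = [] := by
    apply List.filter_eq_nil_iff.mpr
    intro j hj
    have := (List.mem_range'_1.mp hj).2
    simp only [Bool.and_eq_true, decide_eq_true_eq, not_and]
    omega
  have h3 : (List.range' bhi (b.length - bhi)).filter
      (fun j => (decide (blo ≤ j) && decide (j < bhi)) && (b.getD j ' ' == a.getD i ' ')) = [] := by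
    apply List.filter_eq_nil_iff.mpr
    intro j hj
    have := (List.mem_range'_1.mp hj).1
    simp only [Bool.and_eq_true, decide_eq_true_eq, not_and]
    omega
  rw [h1, h3, List.nil_append, List.append_nil]
  apply List.filter_congr
  intro j hj
  obtain ⟨hj1, hj2⟩ := List.mem_range'_1.mp hj
  have hb1 : decide (blo ≤ j) = true := by simpa using hj1
  have hb2 : decide (j < bhi) = true := by simp; omega
  rw [hb1, hb2]
  simp only [Bool.true_and]
  exact BEq.comm

-- best invariant: a zero best is still the initial triple, a positive best is a genuine block
def GBp (a b : List Char) (alo blo : Nat) (best : Nat × Nat × Nat) : Prop :=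
  (best.2.2 = 0 → best = (alo, blo, 0)) ∧
  (1 ≤ best.2.2 → alo ≤ best.1 ∧ blo ≤ best.2.1 ∧
    best.2.2 ≤ runW a b alo blo (best.1 + best.2.2 - 1) (best.2.1 + best.2.2 - 1))

lemma updB_mono (a b : List Char) (alo blo i : Nat) (best : Nat × Nat × Nat) (j : Nat) :
    best.2.2 ≤ (updB a b alo blo i best j).2.2 := by
  unfold updB
  dsimp only
  split_ifs with h
  · dsimp only; omega
  · exact le_rfl

lemma updB_fold_mono (a b : List Char) (alo blo i : Nat) :
    ∀ (l : List Nat) (best : Nat × Nat × Nat),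
      best.2.2 ≤ (l.foldl (updB a b alo blo i) best).2.2 := by
  intro l
  induction l with
  | nil => intro best; exact le_rfl
  | cons j js ih =>
    intro best
    exact le_trans (updB_mono a b alo blo i best j) (ih _)

lemma updB_fold_elem (a b : List Char) (alo blo i : Nat) :
    ∀ (l : List Nat) (best : Nat × Nat × Nat) (j : Nat), j ∈ l →
      runW a b alo blo i j ≤ (l.foldl (updB a b alo blo i) best).2.2 := by
  intro l
  induction l with
  | nil => intro _ _ hm; simp at hm
  | cons x xs ih =>
    intro best j hm
    rcases List.mem_cons.mp hm with rfl | hm'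
    · refine le_trans ?_ (updB_fold_mono a b alo blo i xs _)
      unfold updB
      dsimp only
      split_ifs with h
      · dsimp only; exact le_rfl
      · omega
    · exact ih _ _ hm'

lemma updB_GB (a b : List Char) (alo blo i : Nat) (best : Nat × Nat × Nat) (j : Nat)
    (h : GBp a b alo blo best) : GBp a b alo blo (updB a b alo blo i best j) := by
  unfold updB
  dsimp only
  split_ifs with hlt
  · have hk : 1 ≤ runW a b alo blo i j := by omega
    obtain ⟨-, -, -, hka, hkb⟩ := runW_pos_facts a b alo blo i j hk
    refine ⟨fun h0 => ?_, fun _ => ?_⟩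
    · dsimp only at h0; omega
    · dsimp only
      refine ⟨by omega, by omega, ?_⟩
      have e1 : i + 1 - runW a b alo blo i j + runW a b alo blo i j - 1 = i := by omega
      have e2 : j + 1 - runW a b alo blo i j + runW a b alo blo i j - 1 = j := by omega
      rw [e1, e2]
  · exact h

lemma updB_fold_GB (a b : List Char) (alo blo i : Nat) :
    ∀ (l : List Nat) (best : Nat × Nat × Nat), GBp a b alo blo best →
      GBp a b alo blo (l.foldl (updB a b alo blo i) best) := by
  intro l
  induction l with
  | nil => intro best h; exact h
  | cons x xs ih => intro best h; exact ih _ (updB_GB a b alo blo i best x h)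

-- A's inner loop: the best is the jsW fold, the dict collects this row's run lengths
lemma A_row (a b : List Char) (alo blo bhi i : Nat) (hi : alo ≤ i) :
    ∀ (js : List Nat) (d new : PySem.Dict Int Nat) (best : Nat × Nat × Nat),
      js.Pairwise (· < ·) →
      (∀ j ∈ js, b.getD j ' ' = a.getD i ' ') →
      DIv a b alo blo bhi i d →
      (dl_inner blo bhi i d js new best).2
          = (js.filter (fun j => decide (blo ≤ j) && decide (j < bhi))).foldl
              (updB a b alo blo i) best
      ∧ (∀ j : Nat, j ∈ js → blo ≤ j → j < bhi →
          ((dl_inner blo bhi i d js new best).1).get? (j : Int)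
            = some (runW a b alo blo i j))
      ∧ (∀ z : Int, (∀ j : Nat, z = (j : Int) → ¬(j ∈ js ∧ blo ≤ j ∧ j < bhi)) →
          ((dl_inner blo bhi i d js new best).1).get? z = new.get? z) := by
  intro js
  induction js with
  | nil =>
    intro d new best _ _ _
    refine ⟨rfl, ?_, fun z _ => rfl⟩
    intro j hm
    simp at hm
  | cons j js ih =>
    intro d new best hpw hchar hDI
    have hpw' := (List.pairwise_cons.mp hpw).2
    have hgt := (List.pairwise_cons.mp hpw).1
    by_cases hb1 : j < blo
    · simp only [dl_inner, if_pos hb1]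
      have hfc : (j :: js).filter (fun j => decide (blo ≤ j) && decide (j < bhi))
          = js.filter (fun j => decide (blo ≤ j) && decide (j < bhi)) := by
        rw [List.filter_cons]
        rw [if_neg (by simp only [Bool.and_eq_true, decide_eq_true_eq]; omega)]
      obtain ⟨c1, c2, c3⟩ := ih d new best hpw' (fun x hx => hchar x (by simp [hx])) hDI
      refine ⟨by rw [hfc]; exact c1, ?_, ?_⟩
      · intro j' hm h1 h2
        rcases List.mem_cons.mp hm with rfl | hm'
        · omega
        · exact c2 j' hm' h1 h2
      · intro z hz
        exact c3 z (fun j' he hmem => hz j' he ⟨by simp [hmem.1], hmem.2.1, hmem.2.2⟩)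
    · by_cases hb2 : bhi ≤ j
      · simp only [dl_inner, if_neg hb1, if_pos hb2]
        have hfc : (j :: js).filter (fun j => decide (blo ≤ j) && decide (j < bhi)) = [] := by
          apply List.filter_eq_nil_iff.mpr
        -- every element is either j itself (≥ bhi) or greater than j
          intro x hx
          rcases List.mem_cons.mp hx with rfl | hx'
          · simp only [Bool.and_eq_true, decide_eq_true_eq, not_and]; omega
          · have := hgt x hx'
            simp only [Bool.and_eq_true, decide_eq_true_eq, not_and]; omega
        refine ⟨?_, ?_, ?_⟩
        · rw [hfc, List.foldl_nil]
        · intro j' hm h1 h2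
          rcases List.mem_cons.mp hm with rfl | hm'
          · omega
          · have := hgt j' hm'; omega
        · intro z hz
          trivial
      · simp only [dl_inner, if_neg hb1, if_neg hb2]
        have hk := kA_eq a b alo blo bhi i d hDI j (hchar j (by simp)).symm hi (by omega) (by omega)
        rw [hk]
        have hstep : (if best.2.2 < runW a b alo blo i j then
            (i + 1 - runW a b alo blo i j, j + 1 - runW a b alo blo i j, runW a b alo blo i j)
            else best) = updB a b alo blo i best j := rfl
        rw [hstep]
        obtain ⟨c1, c2, c3⟩ := ih d (new.insert (j : Int) (runW a b alo blo i j))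
          (updB a b alo blo i best j) hpw' (fun x hx => hchar x (by simp [hx])) hDI
        have hfc : (j :: js).filter (fun j => decide (blo ≤ j) && decide (j < bhi))
            = j :: js.filter (fun j => decide (blo ≤ j) && decide (j < bhi)) := by
          rw [List.filter_cons]
          rw [if_pos (by simp only [Bool.and_eq_true, decide_eq_true_eq]; omega)]
        refine ⟨by rw [hfc, List.foldl_cons]; exact c1, ?_, ?_⟩
        · intro j' hm h1 h2
          rcases List.mem_cons.mp hm with rfl | hm'
          · have hnotin : j' ∉ js := fun hmem => absurd (hgt j' hmem) (by omega)
            rw [c3 (j' : Int) (fun x he hmem => by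
              have : x = j' := by exact_mod_cast he.symm
              subst this
              exact hnotin hmem.1)]
            exact PySem.Dict.get?_insert_self _ _ _
          · exact c2 j' hm' h1 h2
        · intro z hz
          rw [c3 z (fun j' he hmem => hz j' he ⟨by simp [hmem.1], hmem.2.1, hmem.2.2⟩)]
          refine PySem.Dict.get?_insert_of_ne _ _ ?_
          intro he
          exact hz j he ⟨by simp, by omega, by omega⟩

-- membership in a b2j list, both directions
lemma b2j_mem_char (b : List Char) (c : Char) (j : Nat)
    (h : j ∈ (dl_b2j b).getD c []) : j < b.length ∧ b.getD j ' ' = c := by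
  rw [b2j_range] at h
  obtain ⟨hr, hp⟩ := List.mem_filter.mp h
  exact ⟨by have := List.mem_range'_1.mp hr; omega, beq_iff_eq.mp hp⟩

lemma b2j_mem_of (b : List Char) (c : Char) (j : Nat)
    (h1 : j < b.length) (h2 : b.getD j ' ' = c) : j ∈ (dl_b2j b).getD c [] := by
  rw [b2j_range]
  exact List.mem_filter.mpr ⟨List.mem_range'_1.mpr ⟨by omega, by omega⟩, beq_iff_eq.mpr h2⟩

-- one processed row advances the dict invariant
lemma A_row_DI (a b : List Char) (alo blo bhi i : Nat) (hi : alo ≤ i) (hbl : bhi ≤ b.length)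
    (d : PySem.Dict Int Nat) (best : Nat × Nat × Nat) (hDI : DIv a b alo blo bhi i d) :
    DIv a b alo blo bhi (i + 1)
      (dl_inner blo bhi i d ((dl_b2j b).getD (a.getD i ' ') []) PySem.Dict.empty best).1 := by
  obtain ⟨-, c2, c3⟩ := A_row a b alo blo bhi i hi ((dl_b2j b).getD (a.getD i ' ') [])
    d PySem.Dict.empty best (b2j_sorted b (a.getD i ' '))
    (fun x hx => (b2j_mem_char b _ x hx).2) hDI
  have hpv : ∀ j : Nat, prevV a b alo blo (i + 1) j = runW a b alo blo i j := by
    intro j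
    unfold prevV
    rw [if_neg (by omega)]
    simp
  constructor
  · intro z v hzv
    by_cases hcase : ∃ j : Nat, z = (j : Int) ∧ j ∈ (dl_b2j b).getD (a.getD i ' ') []
        ∧ blo ≤ j ∧ j < bhi
    · obtain ⟨j, he, hm, h1, h2⟩ := hcase
      have := c2 j hm h1 h2
      rw [he, this] at hzv
      injection hzv with hv
      have hch := (b2j_mem_char b _ j hm).2
      have hpos := runW_pos a b alo blo i j ⟨hch.symm, hi, h1⟩
      exact ⟨j, he, h1, h2, by rw [hpv, ← hv], by omega⟩
    · rw [c3 z (fun j he hmem => hcase ⟨j, he, hmem⟩), PySem.Dict.get?_empty] at hzv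
      cases hzv
  · intro j h1 h2 hp
    rw [hpv] at hp ⊢
    obtain ⟨hch, -, -, -, -⟩ := runW_pos_facts a b alo blo i j hp
    exact c2 j (b2j_mem_of b _ j (by omega) hch.symm) h1 h2

-- B's inner step (the literal loop body of flm2's row)
def stepB (a b : List Char) (blo i : Nat) (prev : List Nat)
    (rs : List Nat × (Nat × Nat × Nat)) (idx : Nat) : List Nat × (Nat × Nat × Nat) :=
  if a.getD i ' ' = b.getD (blo + idx) ' ' then
    let k := if idx = 0 then 1 else prev.getD (idx - 1) 0 + 1
    let cur' := rs.1.set idx k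
    let best' := if rs.2.2.2 < k then (i + 1 - k, blo + idx + 1 - k, k) else rs.2
    (cur', best')
  else rs

-- B's inner loop: same best fold, and the rolling row advances the list invariant
lemma B_row_aux (a b : List Char) (alo blo bhi i : Nat) (best0 : Nat × Nat × Nat) (hi : alo ≤ i)
    (prev : List Nat) (hLI : LIv a b alo blo (bhi - blo) i prev) :
    ∀ n, n ≤ bhi - blo →
      (((List.range n).foldl (stepB a b blo i prev) (List.replicate (bhi - blo) 0, best0)).1.length
          = bhi - blo
        ∧ (∀ idx, idx < n →
            ((List.range n).foldl (stepB a b blo i prev) (List.replicate (bhi - blo) 0, best0)).1.getD idx 0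
              = runW a b alo blo i (blo + idx))
        ∧ (∀ idx, n ≤ idx → idx < bhi - blo →
            ((List.range n).foldl (stepB a b blo i prev) (List.replicate (bhi - blo) 0, best0)).1.getD idx 0 = 0)
        ∧ ((List.range n).foldl (stepB a b blo i prev) (List.replicate (bhi - blo) 0, best0)).2
            = ((List.range' blo n).filter (fun j => a.getD i ' ' == b.getD j ' ')).foldl
                (updB a b alo blo i) best0) := by
  intro n
  induction n with
  | zero =>
    intro _
    simp only [List.range_zero, List.foldl_nil]
    refine ⟨List.length_replicate, fun idx h => by omega, fun idx _ h => ?_, by simp⟩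
    rw [List.getD_eq_getElem?_getD, List.getElem?_replicate, if_pos h]
    rfl
  | succ n ih =>
    intro hn
    have hlt : n < bhi - blo := by omega
    obtain ⟨q1, q2, q3, q4⟩ := ih (by omega)
    rw [List.range_succ, List.foldl_append, List.foldl_cons, List.foldl_nil]
    set R := (List.range n).foldl (stepB a b blo i prev) (List.replicate (bhi - blo) 0, best0) with hR
    have hsplit : List.range' blo (n + 1) = List.range' blo n ++ [blo + n] := by
      rw [← List.range'_append_1 (s := blo) (m := n) (n := 1)]
      rfl
    by_cases hm0 : a.getD i ' ' = b.getD (blo + n) ' '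
    · rw [stepB, if_pos hm0]
      have hk := kB_eq a b alo blo bhi i prev hLI n hlt hm0 hi
      rw [hk]
      refine ⟨by rw [List.length_set]; exact q1, ?_, ?_, ?_⟩
      · intro idx hidx
        by_cases he : idx = n
        · subst he
          rw [List.getD_eq_getElem?_getD, List.getElem?_set_self (by rw [q1]; exact hlt)]
          rfl
        · rw [List.getD_eq_getElem?_getD, List.getElem?_set_ne (by omega),
            ← List.getD_eq_getElem?_getD]
          exact q2 idx (by omega)
      · intro idx h1 h2
        rw [List.getD_eq_getElem?_getD, List.getElem?_set_ne (by omega),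
          ← List.getD_eq_getElem?_getD]
        exact q3 idx (by omega) h2
      · rw [hsplit, List.filter_append, List.foldl_append, ← q4]
        have : [blo + n].filter (fun j => a.getD i ' ' == b.getD j ' ') = [blo + n] := by
          rw [List.filter_cons, if_pos (beq_iff_eq.mpr hm0)]
          rfl
        rw [this, List.foldl_cons, List.foldl_nil]
        rfl
    · rw [stepB, if_neg hm0]
      refine ⟨q1, ?_, fun idx h1 h2 => q3 idx (by omega) h2, ?_⟩
      · intro idx hidx
        by_cases he : idx = n
        · subst he
          rw [q3 idx le_rfl hlt, runW, if_neg (fun h => hm0 h.1)]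
        · exact q2 idx (by omega)
      · rw [hsplit, List.filter_append, List.foldl_append, ← q4]
        have : [blo + n].filter (fun j => a.getD i ' ' == b.getD j ' ') = [] := by
          rw [List.filter_cons, if_neg (fun h => hm0 (beq_iff_eq.mp h))]
          rfl
        rw [this, List.foldl_nil]

lemma B_row (a b : List Char) (alo blo bhi i : Nat) (hi : alo ≤ i)
    (prev : List Nat) (best0 : Nat × Nat × Nat) (hLI : LIv a b alo blo (bhi - blo) i prev) :
    ((List.range (bhi - blo)).foldl (stepB a b blo i prev) (List.replicate (bhi - blo) 0, best0)).2
        = (jsW a b blo bhi i).foldl (updB a b alo blo i) best0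
      ∧ LIv a b alo blo (bhi - blo) (i + 1)
          ((List.range (bhi - blo)).foldl (stepB a b blo i prev) (List.replicate (bhi - blo) 0, best0)).1 := by
  obtain ⟨q1, q2, -, q4⟩ := B_row_aux a b alo blo bhi i hi prev hLI (best0 := best0) (bhi - blo) le_rfl
  refine ⟨by rw [q4]; rfl, q1, ?_⟩
  intro idx hidx
  rw [q2 idx hidx]
  unfold prevV
  rw [if_neg (by omega)]
  simp

-- both outer folds keep equal bests, with the max/genuineness invariants
lemma AB_rows (a b : List Char) (alo blo bhi : Nat) (hbl : bhi ≤ b.length) (hw : blo ≤ bhi) :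
    ∀ (n s : Nat) (dA : PySem.Dict Int Nat) (prevB : List Nat) (best : Nat × Nat × Nat),
      alo ≤ s →
      DIv a b alo blo bhi s dA → LIv a b alo blo (bhi - blo) s prevB →
      GBp a b alo blo best →
      (∀ i' j, alo ≤ i' → i' < s → blo ≤ j → j < bhi → runW a b alo blo i' j ≤ best.2.2) →
      (((List.range' s n).foldl
          (fun (st : PySem.Dict Int Nat × (Nat × Nat × Nat)) i =>
            dl_inner blo bhi i st.1 ((dl_b2j b).getD (a.getD i ' ') []) PySem.Dict.empty st.2)
          (dA, best)).2
        = ((List.range' s n).foldl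
            (fun (st : List Nat × (Nat × Nat × Nat)) i =>
              (List.range (bhi - blo)).foldl (stepB a b blo i st.1)
                (List.replicate (bhi - blo) 0, st.2)) (prevB, best)).2)
      ∧ GBp a b alo blo (((List.range' s n).foldl
            (fun (st : List Nat × (Nat × Nat × Nat)) i =>
              (List.range (bhi - blo)).foldl (stepB a b blo i st.1)
                (List.replicate (bhi - blo) 0, st.2)) (prevB, best)).2)
      ∧ (∀ i' j, alo ≤ i' → i' < s + n → blo ≤ j → j < bhi →
          runW a b alo blo i' j ≤ (((List.range' s n).foldl
            (fun (st : List Nat × (Nat × Nat × Nat)) i =>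
              (List.range (bhi - blo)).foldl (stepB a b blo i st.1)
                (List.replicate (bhi - blo) 0, st.2)) (prevB, best)).2).2.2) := by
  intro n
  induction n with
  | zero =>
    intro s dA prevB best hs hDI hLI hGB hBM
    simp only [List.range', List.foldl_nil]
    exact ⟨trivial, hGB, fun i' j h1 h2 h3 h4 => hBM i' j h1 (by omega) h3 h4⟩
  | succ n ih =>
    intro s dA prevB best hs hDI hLI hGB hBM
    rw [List.range'_succ, List.foldl_cons, List.foldl_cons]
    have hA := A_row a b alo blo bhi s hs ((dl_b2j b).getD (a.getD s ' ') [])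
      dA PySem.Dict.empty best (b2j_sorted b (a.getD s ' '))
      (fun x hx => (b2j_mem_char b _ x hx).2) hDI
    have hAbest := hA.1
    rw [b2j_window a b blo bhi s hbl hw] at hAbest
    have hADI := A_row_DI a b alo blo bhi s hs hbl dA best hDI
    have hB := B_row a b alo blo bhi s hs prevB best hLI
    set RA := dl_inner blo bhi s dA ((dl_b2j b).getD (a.getD s ' ') []) PySem.Dict.empty best
      with hRA
    set RB := (List.range (bhi - blo)).foldl (stepB a b blo s prevB)
      (List.replicate (bhi - blo) 0, best) with hRB
    have hbest : RA.2 = RB.2 := by rw [hAbest, hB.1]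
    have hGB' : GBp a b alo blo RB.2 := by
      rw [hB.1]
      exact updB_fold_GB a b alo blo s _ best hGB
    have hBM' : ∀ i' j, alo ≤ i' → i' < s + 1 → blo ≤ j → j < bhi →
        runW a b alo blo i' j ≤ RB.2.2.2 := by
      intro i' j h1 h2 h3 h4
      by_cases hrow : i' = s
      · subst hrow
        by_cases hz : 1 ≤ runW a b alo blo i' j
        · obtain ⟨hch, -, -, -, -⟩ := runW_pos_facts a b alo blo i' j hz
          have hmem : j ∈ jsW a b blo bhi i' :=
            List.mem_filter.mpr ⟨List.mem_range'_1.mpr ⟨h3, by omega⟩, beq_iff_eq.mpr hch⟩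
          rw [hB.1]
          exact updB_fold_elem a b alo blo i' _ best j hmem
        · omega
      · have := hBM i' j h1 (by omega) h3 h4
        have hmono : best.2.2 ≤ RB.2.2.2 := by
          rw [hB.1]
          exact updB_fold_mono a b alo blo s _ best
        omega
    have ihres := ih (s + 1) RA.1 RB.1 RB.2 (by omega) (by rwa [hRA] at hADI) hB.2 hGB' hBM'
    have eRA : RA = (RA.1, RB.2) := by rw [← hbest]
    have eRB : RB = (RB.1, RB.2) := rfl
    rw [eRA, eRB]
    exact ⟨ihres.1, ihres.2.1, fun i' j h1 h2 h3 h4 => ihres.2.2 i' j h1 (by omega) h3 h4⟩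

-- with the invariants, the two extension loops of find_longest_match cannot fire
lemma extendL_noop (a b : List Char) (alo ahi blo bhi : Nat) (best : Nat × Nat × Nat)
    (hGB : GBp a b alo blo best)
    (hBM : ∀ i' j, alo ≤ i' → i' < ahi → blo ≤ j → j < bhi → runW a b alo blo i' j ≤ best.2.2)
    (hP : PInv alo ahi blo bhi best) :
    dl_extendL a b alo blo best.1 best.2.1 best.2.2 = best := by
  rw [dl_extendL]
  split_ifs with h
  · exfalso
    obtain ⟨h1, h2, h3⟩ := h
    rcases Nat.eq_zero_or_pos best.2.2 with hz | hpos
    · rw [hGB.1 hz] at h1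
      simp at h1
    · obtain ⟨g1, g2, g3⟩ := hGB.2 hpos
      obtain ⟨bi, bj, bk⟩ := best
      try dsimp only at h1
      try dsimp only at h2
      try dsimp only at h3
      try dsimp only at g1
      try dsimp only at g2
      try dsimp only at g3
      try dsimp only at hpos
      try dsimp only at hBM
      obtain ⟨p1, p2, p3, p4⟩ := hP
      try dsimp only at p1
      try dsimp only at p2
      try dsimp only at p3
      try dsimp only at p4
      have hlow : bk + 1 ≤ runW a b alo blo (bi + bk - 1) (bj + bk - 1) := by
        apply runW_lower a b alo blo bk (bi + bk - 1) (bj + bk - 1)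
        · intro t ht
          by_cases hte : t = bk
          · subst hte
            have e1 : bi + t - 1 - t = bi - 1 := by omega
            have e2 : bj + t - 1 - t = bj - 1 := by omega
            rw [e1, e2]
            exact h3
          · exact (runW_diag a b alo blo (bi + bk - 1) (bj + bk - 1) t (by omega)).1
        · omega
        · omega
        · omega
        · omega
      have hup := hBM (bi + bk - 1) (bj + bk - 1) (by omega) (by omega) (by omega) (by omega)
      try dsimp only at hup
      omega
  · rfl

lemma extendR_noop (a b : List Char) (alo ahi blo bhi : Nat) (best : Nat × Nat × Nat)
    (hGB : GBp a b alo blo best)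
    (hBM : ∀ i' j, alo ≤ i' → i' < ahi → blo ≤ j → j < bhi → runW a b alo blo i' j ≤ best.2.2)
    (hP : PInv alo ahi blo bhi best) :
    dl_extendR a b ahi bhi best.1 best.2.1 best.2.2 = best := by
  rw [dl_extendR]
  split_ifs with h
  · exfalso
    obtain ⟨h1, h2, h3⟩ := h
    rcases Nat.eq_zero_or_pos best.2.2 with hz | hpos
    · have hb0 := hGB.1 hz
      rw [hb0] at h1 h2 h3
      simp only [Nat.add_zero] at h1 h2 h3
      have hpos1 := runW_pos a b alo blo alo blo ⟨h3, le_rfl, le_rfl⟩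
      have hle := hBM alo blo le_rfl h1 le_rfl h2
      rw [hb0] at hle
      simp only [] at hle
      omega
    · obtain ⟨g1, g2, g3⟩ := hGB.2 hpos
      obtain ⟨bi, bj, bk⟩ := best
      try dsimp only at h1
      try dsimp only at h2
      try dsimp only at h3
      try dsimp only at g1
      try dsimp only at g2
      try dsimp only at g3
      try dsimp only at hpos
      try dsimp only at hBM
      obtain ⟨p1, p2, p3, p4⟩ := hP
      try dsimp only at p1
      try dsimp only at p2
      try dsimp only at p3
      try dsimp only at p4
      have hlow : bk + 1 ≤ runW a b alo blo (bi + bk) (bj + bk) := by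
        apply runW_lower a b alo blo bk (bi + bk) (bj + bk)
        · intro t ht
          by_cases ht0 : t = 0
          · subst ht0
            simpa using h3
          · have hd := (runW_diag a b alo blo (bi + bk - 1) (bj + bk - 1) (t - 1) (by omega)).1
            have e1 : bi + bk - 1 - (t - 1) = bi + bk - t := by omega
            have e2 : bj + bk - 1 - (t - 1) = bj + bk - t := by omega
            rwa [e1, e2] at hd
        · omega
        · omega
        · omega
        · omega
      have hup := hBM (bi + bk) (bj + bk) (by omega) h1 (by omega) h2
      try dsimp only at hup
      omega
  · rfl

-- the two longest-match computations agree
lemma flm2_eq (a b : List Char) (alo ahi blo bhi : Nat)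
    (halo : alo ≤ ahi) (hw : blo ≤ bhi) (hbl : bhi ≤ b.length) :
    dl_flm a b (dl_b2j b) alo ahi blo bhi = flm2 a b alo ahi blo bhi := by
  have hDI0 : DIv a b alo blo bhi alo PySem.Dict.empty := by
    constructor
    · intro z v h
      rw [PySem.Dict.get?_empty] at h
      cases h
    · intro j _ _ hp
      unfold prevV at hp
      rw [if_pos le_rfl] at hp
      omega
  have hLI0 : LIv a b alo blo (bhi - blo) alo (List.replicate (bhi - blo) 0) := by
    refine ⟨List.length_replicate, ?_⟩
    intro idx hidx
    unfold prevV
    rw [if_pos le_rfl, List.getD_eq_getElem?_getD, List.getElem?_replicate, if_pos hidx]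
    rfl
  have hGB0 : GBp a b alo blo (alo, blo, 0) := ⟨fun _ => rfl, fun h => absurd h (by simp)⟩
  have hBM0 : ∀ i' j, alo ≤ i' → i' < alo → blo ≤ j → j < bhi →
      runW a b alo blo i' j ≤ (alo, blo, (0 : Nat)).2.2 := by
    intro i' j h1 h2 _ _
    omega
  obtain ⟨hEQ, hGBt, hBMt⟩ := AB_rows a b alo blo bhi hbl hw (ahi - alo) alo
    PySem.Dict.empty (List.replicate (bhi - blo) 0) (alo, blo, 0) le_rfl hDI0 hLI0 hGB0 hBM0
  -- A-side window bounds of the fold best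
  have hout := dl_outer_inv a (dl_b2j b) alo ahi blo bhi (ahi - alo) alo
    (PySem.Dict.empty, (alo, blo, 0)) le_rfl (by omega)
    (fun z v h => by rw [PySem.Dict.get?_empty] at h; exact absurd h (by simp))
    ⟨le_rfl, by simp; omega, le_rfl, by simp; omega⟩
  obtain ⟨-, hPA⟩ := hout
  unfold dl_flm
  generalize hst : (List.range' alo (ahi - alo)).foldl
      (fun (st : PySem.Dict Int Nat × (Nat × Nat × Nat)) i =>
        dl_inner blo bhi i st.1 ((dl_b2j b).getD (a.getD i ' ') []) PySem.Dict.empty st.2)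
      (PySem.Dict.empty, (alo, blo, 0)) = stA at hEQ hPA ⊢
  obtain ⟨dA, bi, bj, bk⟩ := stA
  dsimp only at hEQ hPA ⊢
  rw [← hEQ] at hGBt hBMt
  have hBMt' : ∀ i' j, alo ≤ i' → i' < ahi → blo ≤ j → j < bhi →
      runW a b alo blo i' j ≤ ((bi, bj, bk) : Nat × Nat × Nat).2.2 :=
    fun i' j u1 u2 u3 u4 => hBMt i' j u1 (by omega) u3 u4
  have hL : dl_extendL a b alo blo bi bj bk = (bi, bj, bk) :=
    extendL_noop a b alo ahi blo bhi (bi, bj, bk) hGBt hBMt' hPA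
  have hR : dl_extendR a b ahi bhi bi bj bk = (bi, bj, bk) :=
    extendR_noop a b alo ahi blo bhi (bi, bj, bk) hGBt hBMt' hPA
  rw [hL]
  dsimp only
  rw [hR]
  unfold flm2
  exact hEQ

-- a degenerate window yields the empty match
lemma fold_snd_const (l : List Nat) :
    ∀ (st : List Nat × (Nat × Nat × Nat)),
      ((l.foldl (fun (st : List Nat × (Nat × Nat × Nat)) _ => ((List.replicate 0 0 : List Nat), st.2)) st)).2
        = st.2 := by
  induction l with
  | nil => intro st; rfl
  | cons x xs ih => intro st; rw [List.foldl_cons]; exact ih _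

lemma flm2_degenerate (a b : List Char) (alo ahi blo bhi : Nat)
    (h : ahi ≤ alo ∨ bhi ≤ blo) : flm2 a b alo ahi blo bhi = (alo, blo, 0) := by
  rcases h with h | h
  · unfold flm2
    have e : ahi - alo = 0 := by omega
    rw [e]
    rfl
  · unfold flm2
    have e : bhi - blo = 0 := by omega
    rw [e]
    show (((List.range' alo (ahi - alo)).foldl
      (fun (st : List Nat × (Nat × Nat × Nat)) _ => ((List.replicate 0 0 : List Nat), st.2))
      (List.replicate 0 0, (alo, blo, 0)))).2 = (alo, blo, 0)
    exact fold_snd_const _ _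

-- unconditional window bounds for flm2 (needed for termination of Gfun and the stack measure)
lemma stepB_fold_inv (a b : List Char) (alo ahi blo bhi i : Nat) (hi : alo ≤ i) (hia : i < ahi)
    (prev : List Nat) (hprev : ∀ idx, prev.getD idx 0 + alo ≤ i ∧ prev.getD idx 0 ≤ idx + 1) :
    ∀ (l : List Nat) (cur : List Nat) (best : Nat × Nat × Nat),
      (∀ idx, cur.getD idx 0 + alo ≤ i + 1 ∧ cur.getD idx 0 ≤ idx + 1) →
      PInv alo ahi blo bhi best →
      (∀ idx ∈ l, idx < bhi - blo) →
      (∀ idx, (l.foldl (stepB a b blo i prev) (cur, best)).1.getD idx 0 + alo ≤ i + 1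
          ∧ (l.foldl (stepB a b blo i prev) (cur, best)).1.getD idx 0 ≤ idx + 1)
      ∧ PInv alo ahi blo bhi (l.foldl (stepB a b blo i prev) (cur, best)).2 := by
  intro l
  induction l with
  | nil => intro cur best hc hP _; exact ⟨hc, hP⟩
  | cons idx l ih =>
    intro cur best hc hP hb
    rw [List.foldl_cons]
    by_cases hm : a.getD i ' ' = b.getD (blo + idx) ' '
    · rw [stepB, if_pos hm]
      have hkb : (if idx = 0 then 1 else prev.getD (idx - 1) 0 + 1) + alo ≤ i + 1
          ∧ (if idx = 0 then 1 else prev.getD (idx - 1) 0 + 1) ≤ idx + 1 := by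
        split_ifs with h0
        · omega
        · have := hprev (idx - 1)
          omega
      have hidx : idx < bhi - blo := hb idx (by simp)
      refine ih _ _ ?_ ?_ (fun x hx => hb x (by simp [hx]))
      · intro idx'
        dsimp only
        by_cases he : idx' = idx
        · subst he
          by_cases hlen : idx' < cur.length
          · rw [List.getD_eq_getElem?_getD, List.getElem?_set_self hlen, Option.getD_some]
            omega
          · rw [List.set_eq_of_length_le (by omega)]
            exact hc idx'
        · rw [List.getD_eq_getElem?_getD, List.getElem?_set_ne (fun hh => he hh.symm),
            ← List.getD_eq_getElem?_getD]
          exact hc idx'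
      · dsimp only
        by_cases hbest : best.2.2 < (if idx = 0 then 1 else prev.getD (idx - 1) 0 + 1)
        · rw [if_pos hbest]
          unfold PInv at hP ⊢
          dsimp only
          omega
        · rw [if_neg hbest]
          exact hP
    · rw [stepB, if_neg hm]
      exact ih _ _ hc hP (fun x hx => hb x (by simp [hx]))

lemma flm2_PInv' (a b : List Char) (alo ahi blo bhi : Nat)
    (hk : (flm2 a b alo ahi blo bhi).2.2 ≠ 0) :
    PInv alo ahi blo bhi (flm2 a b alo ahi blo bhi) := by
  by_cases halo : alo ≤ ahi
  · by_cases hw : blo ≤ bhi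
    · -- genuine window: run the row invariant
      have main : ∀ (n s : Nat) (prev : List Nat) (best : Nat × Nat × Nat),
          s + n = ahi → alo ≤ s →
          (∀ idx, prev.getD idx 0 + alo ≤ s ∧ prev.getD idx 0 ≤ idx + 1) →
          PInv alo ahi blo bhi best →
          PInv alo ahi blo bhi (((List.range' s n).foldl
            (fun (st : List Nat × (Nat × Nat × Nat)) i =>
              (List.range (bhi - blo)).foldl (stepB a b blo i st.1)
                (List.replicate (bhi - blo) 0, st.2)) (prev, best)).2) := by
        intro n
        induction n with
        | zero => intro s prev best _ _ _ hP; simpa using hP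
        | succ n ih =>
          intro s prev best hsum hs hprev hP
          rw [List.range'_succ, List.foldl_cons]
          have hstep := stepB_fold_inv a b alo ahi blo bhi s hs (by omega) prev hprev
            (List.range (bhi - blo)) (List.replicate (bhi - blo) 0) best
            (fun idx => by
              rw [List.getD_eq_getElem?_getD, List.getElem?_replicate]
              split_ifs <;> simp only [Option.getD_some, Option.getD_none] <;> omega)
            hP (fun x hx => List.mem_range.mp hx)
          exact ih (s + 1) _ _ (by omega) (by omega)
            (fun idx => (hstep.1 idx).imp (fun h => by omega) id) hstep.2
      have := main (ahi - alo) alo (List.replicate (bhi - blo) 0) (alo, blo, 0)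
        (by omega) le_rfl
        (fun idx => by
          rw [List.getD_eq_getElem?_getD, List.getElem?_replicate]
          split_ifs <;> simp only [Option.getD_some, Option.getD_none] <;> omega)
        ⟨le_rfl, by simpa using halo, le_rfl, by simpa using hw⟩
      unfold flm2
      exact this
    · rw [flm2_degenerate a b alo ahi blo bhi (Or.inr (by omega))] at hk ⊢
      exact absurd rfl hk
  · rw [flm2_degenerate a b alo ahi blo bhi (Or.inl (by omega))] at hk ⊢
    exact absurd rfl hk

-- total matched characters of a window (the value both recursions compute)
def Gfun (a b : List Char) (alo ahi blo bhi : Nat) : Nat :=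
  if h : (flm2 a b alo ahi blo bhi).2.2 = 0 then 0
  else
    (flm2 a b alo ahi blo bhi).2.2
      + Gfun a b alo (flm2 a b alo ahi blo bhi).1 blo (flm2 a b alo ahi blo bhi).2.1
      + Gfun a b ((flm2 a b alo ahi blo bhi).1 + (flm2 a b alo ahi blo bhi).2.2) ahi
          ((flm2 a b alo ahi blo bhi).2.1 + (flm2 a b alo ahi blo bhi).2.2) bhi
termination_by ahi - alo
decreasing_by
  · have := flm2_PInv' a b alo ahi blo bhi h
    unfold PInv at this
    omega
  · have := flm2_PInv' a b alo ahi blo bhi h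
    unfold PInv at this
    omega

lemma Gfun_degenerate (a b : List Char) (alo ahi blo bhi : Nat)
    (h : ahi ≤ alo ∨ bhi ≤ blo) : Gfun a b alo ahi blo bhi = 0 := by
  rw [Gfun, flm2_degenerate a b alo ahi blo bhi h]
  rfl

-- the matched total of difflib's recursion is Gfun
lemma smg (a b : List Char) :
    ∀ (fuel alo ahi blo bhi : Nat), ahi - alo < fuel → alo ≤ ahi → blo ≤ bhi → bhi ≤ b.length →
      sumK (dl_matchRec a b (dl_b2j b) fuel alo ahi blo bhi) = Gfun a b alo ahi blo bhi := by
  intro fuel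
  induction fuel with
  | zero => intro alo ahi blo bhi h; omega
  | succ f ih =>
    intro alo ahi blo bhi hfuel halo hw hbl
    rcases hfl : flm2 a b alo ahi blo bhi with ⟨i, j, k⟩
    have hflA : dl_flm a b (dl_b2j b) alo ahi blo bhi = (i, j, k) := by
      rw [flm2_eq a b alo ahi blo bhi halo hw hbl, hfl]
    simp only [dl_matchRec, hflA]
    rw [Gfun, hfl]
    by_cases hk : k = 0
    · rw [if_pos hk, dif_pos hk]
      simp [sumK]
    · rw [if_neg hk, dif_neg hk]
      dsimp only
      have hP := flm2_PInv' a b alo ahi blo bhi (by rw [hfl]; exact hk)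
      rw [hfl] at hP
      obtain ⟨p1, p2, p3, p4⟩ := hP
      dsimp only at p1 p2 p3 p4
      rw [sumK_append, sumK_append]
      have hL : sumK (if alo < i ∧ blo < j then dl_matchRec a b (dl_b2j b) f alo i blo j else [])
          = Gfun a b alo i blo j := by
        split_ifs with hg
        · exact ih alo i blo j (by omega) (by omega) (by omega) (by omega)
        · have : i = alo ∨ j = blo := by omega
          rw [Gfun_degenerate a b alo i blo j (by omega)]
          rfl
      have hR : sumK (if i + k < ahi ∧ j + k < bhi then
            dl_matchRec a b (dl_b2j b) f (i + k) ahi (j + k) bhi else [])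
          = Gfun a b (i + k) ahi (j + k) bhi := by
        split_ifs with hg
        · exact ih (i + k) ahi (j + k) bhi (by omega) (by omega) (by omega) (by omega)
        · rw [Gfun_degenerate a b (i + k) ahi (j + k) bhi (by omega)]
          rfl
      rw [hL, hR]
      simp [sumK]
      omega

-- the stack measure: every loop iteration strictly decreases it
def stackMu : List (Nat × Nat × Nat × Nat) → Nat
  | [] => 0
  | (alo, ahi, _, _) :: ws => 2 * (ahi - alo) + 1 + stackMu ws

lemma loopB_eq (a b : List Char) :
    ∀ (fuel : Nat) (stack : List (Nat × Nat × Nat × Nat)) (m : Nat),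
      stackMu stack < fuel →
      loopB a b fuel stack m
        = m + (stack.map (fun w => Gfun a b w.1 w.2.1 w.2.2.1 w.2.2.2)).sum := by
  intro fuel
  induction fuel with
  | zero => intro stack m h; omega
  | succ f ih =>
    intro stack m h
    match stack with
    | [] => simp [loopB]
    | (alo, ahi, blo, bhi) :: ws =>
      rcases hfl : flm2 a b alo ahi blo bhi with ⟨i, j, k⟩
      simp only [loopB, hfl, List.map_cons, List.sum_cons]
      by_cases hk : k = 0
      · rw [if_neg (by omega)]
        have hG : Gfun a b alo ahi blo bhi = 0 := by
          rw [Gfun, hfl]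
          exact dif_pos hk
        rw [ih ws m (by simp only [stackMu] at h ⊢; omega), hG]
        omega
      · rw [if_pos hk]
        have hP := flm2_PInv' a b alo ahi blo bhi (by rw [hfl]; exact hk)
        rw [hfl] at hP
        obtain ⟨p1, p2, p3, p4⟩ := hP
        dsimp only at p1 p2 p3 p4
        have hmu : stackMu ((i + k, ahi, j + k, bhi) :: (alo, i, blo, j) :: ws) < f := by
          simp only [stackMu] at h ⊢
          omega
        rw [ih _ _ hmu]
        have hG : Gfun a b alo ahi blo bhi
            = k + Gfun a b alo i blo j + Gfun a b (i + k) ahi (j + k) bhi := by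
          rw [Gfun, hfl, dif_neg hk]
        rw [hG]
        simp only [List.map_cons, List.sum_cons]
        omega

-- B's loop computes the matched total of A's matching blocks
lemma matched_eq (a c : List Char) :
    loopB a c (2 * a.length + 2) [(0, a.length, 0, c.length)] 0
      = sumK (dl_getMatchingBlocks a c) := by
  rw [loopB_eq a c _ _ _ (by simp only [stackMu]; omega)]
  simp only [List.map_cons, List.map_nil, List.sum_cons, List.sum_nil]
  rw [← smg a c (a.length + 1) 0 a.length 0 c.length (by omega) (by omega) (by omega) le_rfl]
  unfold dl_getMatchingBlocks
  rw [sumK_append]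
  have hchain := dl_matchRec_chain a c (dl_b2j c) (a.length + 1) 0 a.length 0 c.length
    (Nat.zero_le _) (Nat.zero_le _)
  have hmerge := (dl_merge_chain a.length c.length _ 0 0 0 0 0 le_rfl le_rfl hchain).2
  rw [hmerge]
  simp [sumK]

-- ===== VERDICT (by name: the statement is the Claim_ definition above) =====
theorem calculate_char_diff_spec : Claim_equal_calculate_char_diff := by
  intro baseline current _
  unfold Spec_calculate_char_diff calculate_char_diff calculate_char_diff_alt
  by_cases h : (baseline == current) = true
  · rw [if_pos h]
    have heq : baseline = current := by simpa using h
    subst heq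
    dsimp only
    rw [matched_eq, sumK_blocks_self]
    refine Prod.ext ?_ ?_ <;> dsimp only <;> omega
  · rw [if_neg h]
    dsimp only
    rw [matched_eq]
    have hlam : (fun (s : Nat × Nat) op =>
        let (ins, del) := s
        let (tag, i1, i2, j1, j2) := op
        if tag = "replace" then (ins + (j2 - j1), del + (i2 - i1))
        else if tag = "delete" then (ins, del + (i2 - i1))
        else if tag = "insert" then (ins + (j2 - j1), del)
        else (ins, del)) = opF := rfl
    rw [hlam]
    have hch := blocks_chain baseline.toList current.toList
    have hfold := fold_opcodes baseline.toList.length current.toList.length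
      (dl_getMatchingBlocks baseline.toList current.toList) 0 0 0 0 hch
    have hEA : endA 0 (dl_getMatchingBlocks baseline.toList current.toList)
        = baseline.toList.length := by
      simp [dl_getMatchingBlocks, endA_append_last]
    have hEB : endB 0 (dl_getMatchingBlocks baseline.toList current.toList)
        = current.toList.length := by
      simp [dl_getMatchingBlocks, endB_append_last]
    rw [hEA, hEB] at hfold
    obtain ⟨hf1, hf2⟩ := hfold
    refine Prod.ext ?_ ?_ <;> dsimp only <;> omega
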